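-- pv_equiv track=rewrite | github.com/jack-chaudier/stark | scripts/referee/causal_contract_counterexamples.py | is_d_separated
-- ===== SOURCE A (Python) =====
-- from itertools import combinations
-- from typing import Dict, Iterable, List, Sequence, Set, Tuple
--
-- Graph = Dict[str, Set[str]]
--
-- def parents(graph: Graph) -> Dict[str, Set[str]]:
--     rev = {node: set() for node in graph}
--     for src, dests in graph.items():
--         for dst in dests:
--             rev.setdefault(dst, set()).add(src)
--     return rev
--
-- def ancestors_of_set(graph: Graph, nodes: Iterable[str]) -> Set[str]:
--     rev = parents(graph)
--     out: Set[str] = set(nodes)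
--     stack = list(nodes)
--     while stack:
--         node = stack.pop()
--         for par in rev.get(node, set()):
--             if par not in out:
--                 out.add(par)
--                 stack.append(par)
--     return out
--
-- def moralized_ancestral_graph(graph: Graph, x: str, y: str, z: Set[str]) -> Dict[str, Set[str]]:
--     relevant = ancestors_of_set(graph, {x, y, *z})
--     rev = parents(graph)
--     undirected = {node: set() for node in relevant}
--
--     for src in relevant:
--         for dst in graph.get(src, set()):
--             if dst in relevant:
--                 undirected[src].add(dst)
--                 undirected[dst].add(src)
--
--     for child in relevant:
--         pars = sorted(par for par in rev.get(child, set()) if par in relevant)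
--         for a, b in combinations(pars, 2):
--             undirected[a].add(b)
--             undirected[b].add(a)
--
--     for blocked in z:
--         undirected.pop(blocked, None)
--     for node in list(undirected):
--         undirected[node].difference_update(z)
--
--     return undirected
--
-- def is_d_separated(graph: Graph, x: str, y: str, z: Set[str]) -> bool:
--     if x in z or y in z:
--         return True
--     moral = moralized_ancestral_graph(graph, x, y, z)
--     if x not in moral or y not in moral:
--         return True
--     stack = [x]
--     seen = {x}
--     while stack:
--         node = stack.pop()
--         if node == y:
--             return False
--         for nxt in moral.get(node, set()):
--             if nxt not in seen:
--                 seen.add(nxt)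
--                 stack.append(nxt)
--     return True
-- ===== SOURCE B (Python) =====
-- def is_d_separated(graph, x, y, z):
--     """Same d-separation test, but as a single generic worklist reachability over an
--     implicit (on-the-fly) moral adjacency: no parent dict and no materialized moral graph."""
--     if x in z or y in z:
--         return True
--     items = list(graph.items())
--
--     def reach(starts, nbrs):
--         seen = set(starts)
--         stack = list(starts)
--         while stack:
--             n = stack.pop()
--             for m in nbrs(n):
--                 if m not in seen:
--                     seen.add(m)
--                     stack.append(m)
--         return seen
--
--     anc = reach([x, y] + list(z), lambda n: [s for s, ds in items if n in ds])
--
--     def live(n):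
--         return n in anc and n not in z
--
--     def moral_nbrs(n):
--         kids = graph.get(n, ())
--         out = []
--         for s, ds in items:
--             if s == n:
--                 out.extend(d for d in ds if live(d))
--             if live(s):
--                 if n in ds:
--                     out.append(s)
--                 elif s != n and any(c in anc and c in ds for c in kids):
--                     out.append(s)
--         return out
--
--     return y not in reach([x], moral_nbrs)
-- ===== Notes on version B (the rewrite author's own statement) =====
-- stated objective: simpler
-- what changed: B replaces A's three-stage pipeline (build a parents dict, DFS it for the ancestral set, materialize the moralized undirected graph with sorted pairwise co-parent edges, then DFS that dict) by one generic worklist-reachability helper used twice with on-the-fly neighbour functions: the moral adjacency (child / parent / co-parent, restricted to live nodes) is computed per node during the traversal, so no parent dict and no moral graph are ever built.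
import Mathlib
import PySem

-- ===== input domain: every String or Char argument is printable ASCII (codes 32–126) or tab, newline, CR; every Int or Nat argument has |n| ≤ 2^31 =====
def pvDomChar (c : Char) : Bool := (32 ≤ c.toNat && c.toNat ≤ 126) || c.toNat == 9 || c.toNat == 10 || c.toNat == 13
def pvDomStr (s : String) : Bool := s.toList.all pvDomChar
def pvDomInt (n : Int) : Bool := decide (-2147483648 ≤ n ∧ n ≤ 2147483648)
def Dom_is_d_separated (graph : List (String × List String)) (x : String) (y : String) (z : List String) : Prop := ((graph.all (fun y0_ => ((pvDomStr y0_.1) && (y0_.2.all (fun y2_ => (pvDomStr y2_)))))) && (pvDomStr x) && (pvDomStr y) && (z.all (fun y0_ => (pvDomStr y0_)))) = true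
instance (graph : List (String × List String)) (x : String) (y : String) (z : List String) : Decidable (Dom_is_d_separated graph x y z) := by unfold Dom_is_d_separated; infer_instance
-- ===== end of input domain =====

-- One line: B replaces A's parents-dict + explicit moralized-graph construction by a single generic
-- worklist reachability used twice with on-the-fly (lazy) moral adjacency; loops are ported with a
-- fuel guard that is provably sufficient.

-- ===== PORT A =====

-- parents(graph): reversed adjacency as a dict of sets
def pvParents (graph : List (String × List String)) : PySem.Dict String (PySem.Set String) :=
  let rev := graph.foldl (fun d p => d.insert p.1 PySem.Set.empty) PySem.Dict.empty
  graph.foldl (fun d p => p.2.foldl (fun d dst =>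
      (d.setdefault dst PySem.Set.empty).modify dst PySem.Set.empty
        (fun s => PySem.Set.add s p.1)) d) rev

-- the 'while stack' loop of ancestors_of_set (stack top = list head; fuel is a termination guard only)
def pvAncLoop (rev : PySem.Dict String (PySem.Set String)) :
    Nat → List String → PySem.Set String → PySem.Set String
  | 0, _, out => out
  | _, [], out => out
  | fuel+1, node :: stack, out =>
      let st := (PySem.Dict.getD rev node PySem.Set.empty : List String).foldl
        (fun (st : PySem.Set String × List String) par =>
          if PySem.Set.contains st.1 par then st else (PySem.Set.add st.1 par, par :: st.2))
        (out, stack)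
      pvAncLoop rev fuel st.2 st.1

def pvAncestorsOfSet (graph : List (String × List String)) (nodes : List String) :
    PySem.Set String :=
  let rev := pvParents graph
  let out := PySem.Set.ofList nodes
  let fuel := nodes.length + (PySem.Set.ofList ((PySem.Dict.values rev).flatten)).length
  pvAncLoop rev fuel nodes.reverse out

def pvMoralized (graph : List (String × List String)) (x y : String) (z : List String) :
    PySem.Dict String (PySem.Set String) :=
  let relevant := pvAncestorsOfSet graph (PySem.Set.ofList (x :: y :: z))
  let rev := pvParents graph
  let und0 := relevant.foldl (fun d node => d.insert node PySem.Set.empty) PySem.Dict.empty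
  let und1 := relevant.foldl (fun d src =>
      ((List.lookup src graph).getD []).foldl (fun d dst =>
        if PySem.Set.contains relevant dst then
          (d.modify src PySem.Set.empty (fun s => PySem.Set.add s dst)).modify dst
            PySem.Set.empty (fun s => PySem.Set.add s src)
        else d) d) und0
  let und2 := relevant.foldl (fun d child =>
      let pars := PySem.List.sorted
        ((PySem.Dict.getD rev child PySem.Set.empty : List String).filter
          (fun par => PySem.Set.contains relevant par)) (fun s => s) false
      (PySem.List.combinations pars 2).foldl (fun d c =>
        match c with
        | [a, b] => (d.modify a PySem.Set.empty (fun s => PySem.Set.add s b)).modify b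
            PySem.Set.empty (fun s => PySem.Set.add s a)
        | _ => d) d) und1
  let und3 := z.foldl (fun d blocked => d.erase blocked) und2
  (PySem.Dict.keys und3).foldl
    (fun d node => d.modify node PySem.Set.empty (fun s => PySem.Set.diff s z)) und3

-- the final 'while stack' loop of is_d_separated
def pvFindLoop (moral : PySem.Dict String (PySem.Set String)) (y : String) :
    Nat → List String → PySem.Set String → Bool
  | 0, _, _ => true
  | _, [], _ => true
  | fuel+1, node :: stack, seen =>
      if node == y then false
      else
        let st := (PySem.Dict.getD moral node PySem.Set.empty : List String).foldl
          (fun (st : PySem.Set String × List String) nxt =>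
            if PySem.Set.contains st.1 nxt then st else (PySem.Set.add st.1 nxt, nxt :: st.2))
          (seen, stack)
        pvFindLoop moral y fuel st.2 st.1

def is_d_separated (graph : List (String × List String)) (x : String) (y : String)
    (z : List String) : Bool :=
  if z.contains x || z.contains y then true
  else
    let moral := pvMoralized graph x y z
    if !(moral.contains x) || !(moral.contains y) then true
    else
      let fuel := 1 + (PySem.Set.ofList ((PySem.Dict.values moral).flatten)).length
      pvFindLoop moral y fuel [x] (PySem.Set.ofList [x])

-- ===== PORT B =====

-- the generic worklist 'reach(starts, nbrs)' of B (stack top = list head; fuel guard only)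
def pvReach (nbrs : String → List String) :
    Nat → List String → PySem.Set String → PySem.Set String
  | 0, _, seen => seen
  | _, [], seen => seen
  | fuel+1, n :: stack, seen =>
      let st := (nbrs n).foldl
        (fun (st : PySem.Set String × List String) m =>
          if PySem.Set.contains st.1 m then st else (PySem.Set.add st.1 m, m :: st.2))
        (seen, stack)
      pvReach nbrs fuel st.2 st.1

def is_d_separated_alt (graph : List (String × List String)) (x : String) (y : String)
    (z : List String) : Bool :=
  if z.contains x || z.contains y then true
  else
    let ancNbrs : String → List String := fun n =>
      (graph.filter (fun p => p.2.contains n)).map (fun p => p.1)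
    let starts := x :: y :: z
    let fuelA := starts.length + (PySem.Set.ofList (graph.map (fun p => p.1))).length
    let anc := pvReach ancNbrs fuelA starts.reverse (PySem.Set.ofList starts)
    let live : String → Bool := fun n => PySem.Set.contains anc n && !(z.contains n)
    let moralNbrs : String → List String := fun n =>
      let kids := (List.lookup n graph).getD []
      graph.foldl (fun out p =>
        let out := if p.1 == n then out ++ p.2.filter (fun d => live d) else out
        if live p.1 then
          if p.2.contains n then out ++ [p.1]
          else if p.1 != n && kids.any (fun c => PySem.Set.contains anc c && p.2.contains c) then
            out ++ [p.1]
          else out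
        else out) []
    let fuelM := 1 + (PySem.Set.ofList
      (graph.map (fun p => p.1) ++ (graph.map (fun p => p.2)).flatten)).length
    !(PySem.Set.contains (pvReach moralNbrs fuelM [x] (PySem.Set.ofList [x])) y)

-- ===== PRECONDITION & SPEC =====

-- Pre_ excludes association lists with a repeated key: a Python dict cannot have duplicate keys, so
-- such lists represent no Python input, and A reads them inconsistently (items-iteration sees every
-- copy, graph.get only the first).
def Pre_is_d_separated (graph : List (String × List String)) (x : String) (y : String)
    (z : List String) : Prop :=
  (graph.map Prod.fst).Nodup
instance (graph : List (String × List String)) (x : String) (y : String) (z : List String) :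
    Decidable (Pre_is_d_separated graph x y z) := by unfold Pre_is_d_separated; infer_instance

def pvWitness_is_d_separated : (List (String × List String)) × String × String × List String :=
  ([("a", ["b"])], "a", "b", [])

def Spec_is_d_separated (graph : List (String × List String)) (x : String) (y : String)
    (z : List String) (out : Bool) : Prop := out = is_d_separated_alt graph x y z
instance (graph : List (String × List String)) (x : String) (y : String) (z : List String)
    (out : Bool) : Decidable (Spec_is_d_separated graph x y z out) := by
  unfold Spec_is_d_separated; infer_instance

-- ===== CLAIM (what is proved, stated in full; the proofs are below) =====
def Claim_equal_is_d_separated : Prop := ∀ (graph : List (String × List String)) (x : String) (y : String) (z : List String), Dom_is_d_separated graph x y z → Pre_is_d_separated graph x y z → Spec_is_d_separated graph x y z (is_d_separated graph x y z)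

-- ===== LEMMAS AND PROOFS =====

-- The directed edge relation of the input graph (read through items-iteration).
def pvEdge (graph : List (String × List String)) (u v : String) : Prop :=
  ∃ p ∈ graph, p.1 = u ∧ v ∈ p.2

-- t is in the ancestral set of {x, y} ∪ z.
def pvInAnc (graph : List (String × List String)) (x y : String) (z : List String)
    (t : String) : Prop :=
  ∃ s, (s = x ∨ s = y ∨ s ∈ z) ∧ Relation.ReflTransGen (fun a b => pvEdge graph b a) s t

def pvLive (graph : List (String × List String)) (x y : String) (z : List String)
    (t : String) : Prop :=
  pvInAnc graph x y z t ∧ t ∉ z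

-- moral adjacency on the ancestral graph
def pvAdj (graph : List (String × List String)) (x y : String) (z : List String)
    (u v : String) : Prop :=
  pvEdge graph u v ∨ pvEdge graph v u ∨
    (u ≠ v ∧ ∃ c, pvInAnc graph x y z c ∧ pvEdge graph u c ∧ pvEdge graph v c)

def pvStepA (graph : List (String × List String)) (x y : String) (z : List String)
    (u v : String) : Prop :=
  pvLive graph x y z u ∧ pvLive graph x y z v ∧ pvAdj graph x y z u v

def pvStepB (graph : List (String × List String)) (x y : String) (z : List String)
    (u v : String) : Prop :=
  pvLive graph x y z v ∧ pvAdj graph x y z u v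

-- worklist machinery ---------------------------------------------------------

def pvPush (st : PySem.Set String × List String) (m : String) :
    PySem.Set String × List String :=
  if PySem.Set.contains st.1 m then st else (PySem.Set.add st.1 m, m :: st.2)

def pvMeas (U : List String) (seen : PySem.Set String) (stack : List String) : Nat :=
  (U.filter (fun u => decide (u ∉ seen))).length + stack.length

lemma pvFilter_drop (U : List String) (seen : PySem.Set String) (m : String)
    (hUnd : U.Nodup) (hmU : m ∈ U) (hm : m ∉ seen) :
    (U.filter (fun u => decide (u ∉ PySem.Set.add seen m))).length + 1 ≤
      (U.filter (fun u => decide (u ∉ seen))).length := by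
  have hfe : U.filter (fun u => decide (u ∉ PySem.Set.add seen m))
      = (U.filter (fun u => decide (u ∉ seen))).filter (fun u => u ≠ m) := by
    rw [List.filter_filter]
    refine List.filter_congr fun u _ => ?_
    simp only [PySem.Set.mem_add, not_or]
    rw [Bool.decide_and, Bool.and_comm, decide_not, decide_not]
  rw [hfe]
  have hFnd : (U.filter (fun u => decide (u ∉ seen))).Nodup := hUnd.filter _
  have hmF : m ∈ U.filter (fun u => decide (u ∉ seen)) := by
    rw [List.mem_filter]; exact ⟨hmU, by simpa using hm⟩
  have herase : (U.filter (fun u => decide (u ∉ seen))).erase m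
      = (U.filter (fun u => decide (u ∉ seen))).filter (fun u => u ≠ m) := by
    rw [List.Nodup.erase_eq_filter hFnd m]
    exact List.filter_congr fun u _ => by simp [bne, Bool.beq_eq_decide_eq]
  rw [← herase, List.length_erase_of_mem hmF]
  have := List.length_pos_of_mem hmF
  omega

def pvNbrClosure (nbrs : String → List String) (a b : String) : Prop :=
  Relation.ReflTransGen (fun u v => v ∈ nbrs u) a b

lemma pvPush_fold_fst (ms : List String) (seen : PySem.Set String) (stack : List String) :
    (ms.foldl pvPush (seen, stack)).1 = PySem.Set.update seen ms := by
  induction ms generalizing seen stack with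
  | nil => rfl
  | cons m ms ih =>
    rw [PySem.Set.update_cons]
    by_cases h : m ∈ seen
    · have h1 : pvPush (seen, stack) m = (seen, stack) := by
        simp [pvPush, h]
      have h2 : PySem.Set.add seen m = seen := by
        simp [PySem.Set.add, h]
      rw [List.foldl_cons, h1, h2, ih]
    · have h1 : pvPush (seen, stack) m = (PySem.Set.add seen m, m :: stack) := by
        simp [pvPush, h]
      rw [List.foldl_cons, h1, ih]

lemma pvPush_fold_snd_mem (ms : List String) (seen : PySem.Set String) (stack : List String)
    (t : String) :
    t ∈ (ms.foldl pvPush (seen, stack)).2 ↔ t ∈ stack ∨ (t ∈ ms ∧ t ∉ seen) := by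
  induction ms generalizing seen stack with
  | nil => simp
  | cons m ms ih =>
    by_cases h : m ∈ seen
    · have h1 : pvPush (seen, stack) m = (seen, stack) := by
        simp [pvPush, h]
      rw [List.foldl_cons, h1, ih]
      constructor
      · rintro (h2 | ⟨h2, h3⟩)
        · exact Or.inl h2
        · exact Or.inr ⟨List.mem_cons_of_mem _ h2, h3⟩
      · rintro (h2 | ⟨h2, h3⟩)
        · exact Or.inl h2
        · rcases List.mem_cons.mp h2 with rfl | h2
          · exact absurd h h3
          · exact Or.inr ⟨h2, h3⟩
    · have h1 : pvPush (seen, stack) m = (PySem.Set.add seen m, m :: stack) := by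
        simp [pvPush, h]
      rw [List.foldl_cons, h1, ih]
      simp only [List.mem_cons, PySem.Set.mem_add]
      constructor
      · rintro ((rfl | h2) | ⟨h2, h3⟩)
        · exact Or.inr ⟨Or.inl rfl, h⟩
        · exact Or.inl h2
        · refine Or.inr ⟨Or.inr h2, fun hc => h3 (Or.inl hc)⟩
      · rintro (h2 | ⟨rfl | h2, h3⟩)
        · exact Or.inl (Or.inr h2)
        · exact Or.inl (Or.inl rfl)
        · by_cases ht : t = m
          · exact Or.inl (Or.inl ht)
          · exact Or.inr ⟨h2, fun hc => (hc.elim h3 ht)⟩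

lemma pvPush_fold_meas (U ms : List String) (seen : PySem.Set String) (stack : List String)
    (hUnd : U.Nodup) (hms : ∀ m ∈ ms, m ∈ U) :
    pvMeas U (ms.foldl pvPush (seen, stack)).1 (ms.foldl pvPush (seen, stack)).2 ≤
      pvMeas U seen stack := by
  induction ms generalizing seen stack with
  | nil => exact le_refl _
  | cons m ms ih =>
    have hmU : m ∈ U := hms m (List.mem_cons_self ..)
    have hms' : ∀ m' ∈ ms, m' ∈ U := fun m' h => hms m' (List.mem_cons_of_mem _ h)
    by_cases h : m ∈ seen
    · have h1 : pvPush (seen, stack) m = (seen, stack) := by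
        simp [pvPush, h]
      rw [List.foldl_cons, h1]
      exact ih seen stack hms'
    · have h1 : pvPush (seen, stack) m = (PySem.Set.add seen m, m :: stack) := by
        simp [pvPush, h]
      rw [List.foldl_cons, h1]
      refine le_trans (ih _ _ hms') ?_
      unfold pvMeas
      have := pvFilter_drop U seen m hUnd hmU h
      simp only [List.length_cons]
      omega

lemma pvReach_cons (nbrs : String → List String) (fuel : Nat) (n : String)
    (stack : List String) (seen : PySem.Set String) :
    pvReach nbrs (fuel+1) (n :: stack) seen =
      pvReach nbrs fuel ((nbrs n).foldl pvPush (seen, stack)).2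
        ((nbrs n).foldl pvPush (seen, stack)).1 := rfl

lemma pvStep_invariants (nbrs : String → List String) (U : List String)
    (hU : ∀ s m, m ∈ nbrs s → m ∈ U) (hUnd : U.Nodup) (fuel : Nat) (n : String)
    (st : List String) (seen : PySem.Set String)
    (hnd : seen.Nodup) (hss : ∀ s ∈ n :: st, s ∈ seen)
    (hproc : ∀ s ∈ seen, s ∉ n :: st → ∀ m ∈ nbrs s, m ∈ seen)
    (hfuel : pvMeas U seen (n :: st) ≤ fuel + 1) :
    ((nbrs n).foldl pvPush (seen, st)).1.Nodup ∧
    (∀ s ∈ ((nbrs n).foldl pvPush (seen, st)).2, s ∈ ((nbrs n).foldl pvPush (seen, st)).1) ∧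
    (∀ s ∈ ((nbrs n).foldl pvPush (seen, st)).1, s ∉ ((nbrs n).foldl pvPush (seen, st)).2 →
       ∀ m ∈ nbrs s, m ∈ ((nbrs n).foldl pvPush (seen, st)).1) ∧
    pvMeas U ((nbrs n).foldl pvPush (seen, st)).1 ((nbrs n).foldl pvPush (seen, st)).2 ≤ fuel := by
  have hfst := pvPush_fold_fst (nbrs n) seen st
  have hsnd := fun t => pvPush_fold_snd_mem (nbrs n) seen st t
  refine ⟨?_, ?_, ?_, ?_⟩
  · rw [hfst]; exact PySem.Set.nodup_update _ _ hnd
  · intro s hs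
    rw [hfst, PySem.Set.mem_update]
    rcases (hsnd s).mp hs with h | ⟨h, _⟩
    · exact Or.inl (hss s (List.mem_cons_of_mem _ h))
    · exact Or.inr h
  · intro s hsseen hsstack m hm
    rw [hfst, PySem.Set.mem_update] at hsseen ⊢
    by_cases hs2 : s ∈ seen
    · by_cases hsn : s = n
      · subst hsn; exact Or.inr hm
      · have hsnotst : s ∉ st := fun hc => hsstack ((hsnd s).mpr (Or.inl hc))
        have hsnot : s ∉ n :: st := by
          intro hc; rcases List.mem_cons.mp hc with h | h
          · exact hsn h
          · exact hsnotst h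
        exact Or.inl (hproc s hs2 hsnot m hm)
    · rcases hsseen with h | h
      · exact absurd h hs2
      · exact absurd ((hsnd s).mpr (Or.inr ⟨h, hs2⟩)) hsstack
  · have h1 := pvPush_fold_meas U (nbrs n) seen st hUnd (fun m hm => hU n m hm)
    unfold pvMeas at h1 hfuel ⊢
    simp only [List.length_cons] at hfuel
    omega

lemma pvReach_sound (nbrs : String → List String) :
    ∀ (fuel : Nat) (stack : List String) (seen : PySem.Set String),
    ∀ t ∈ pvReach nbrs fuel stack seen,
      t ∈ seen ∨ ∃ s ∈ stack, pvNbrClosure nbrs s t := by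
  intro fuel
  induction fuel with
  | zero =>
    intro stack seen t ht
    cases stack with
    | nil => exact Or.inl (by simpa [pvReach] using ht)
    | cons a l => exact Or.inl (by simpa [pvReach] using ht)
  | succ fuel ih =>
    intro stack seen t ht
    cases stack with
    | nil => exact Or.inl (by simpa [pvReach] using ht)
    | cons n st =>
      rw [pvReach_cons] at ht
      rcases ih _ _ t ht with h | ⟨s, hs, hcl⟩
      · rw [pvPush_fold_fst] at h
        rcases (PySem.Set.mem_update _ _ _).mp h with h | h
        · exact Or.inl h
        · exact Or.inr ⟨n, List.mem_cons_self .., Relation.ReflTransGen.single h⟩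
      · rcases (pvPush_fold_snd_mem _ _ _ s).mp hs with h | ⟨h1, _⟩
        · exact Or.inr ⟨s, List.mem_cons_of_mem _ h, hcl⟩
        · exact Or.inr ⟨n, List.mem_cons_self .., Relation.ReflTransGen.head h1 hcl⟩

lemma pvReach_complete (nbrs : String → List String) (U : List String)
    (hU : ∀ s m, m ∈ nbrs s → m ∈ U) (hUnd : U.Nodup) :
    ∀ (fuel : Nat) (stack : List String) (seen : PySem.Set String),
    seen.Nodup → (∀ s ∈ stack, s ∈ seen) →
    (∀ s ∈ seen, s ∉ stack → ∀ m ∈ nbrs s, m ∈ seen) →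
    pvMeas U seen stack ≤ fuel →
    (∀ t ∈ seen, t ∈ pvReach nbrs fuel stack seen) ∧
    (∀ t ∈ pvReach nbrs fuel stack seen, ∀ m ∈ nbrs t, m ∈ pvReach nbrs fuel stack seen) ∧
    (pvReach nbrs fuel stack seen).Nodup := by
  intro fuel
  induction fuel with
  | zero =>
    intro stack seen hnd hss hproc hfuel
    have hstack : stack = [] := by
      cases stack with
      | nil => rfl
      | cons a l => unfold pvMeas at hfuel; simp only [List.length_cons] at hfuel; omega
    subst hstack
    refine ⟨fun t ht => by simpa [pvReach] using ht, ?_, by simpa [pvReach] using hnd⟩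
    intro t ht m hm
    have h1 : t ∈ seen := by simpa [pvReach] using ht
    have h2 := hproc t h1 (by simp) m hm
    simpa [pvReach] using h2
  | succ fuel ih =>
    intro stack seen hnd hss hproc hfuel
    cases stack with
    | nil =>
      refine ⟨fun t ht => by simpa [pvReach] using ht, ?_, by simpa [pvReach] using hnd⟩
      intro t ht m hm
      have h1 : t ∈ seen := by simpa [pvReach] using ht
      have h2 := hproc t h1 (by simp) m hm
      simpa [pvReach] using h2
    | cons n st =>
      rw [pvReach_cons]
      obtain ⟨hnd', hss', hproc', hfuel'⟩ :=
        pvStep_invariants nbrs U hU hUnd fuel n st seen hnd hss hproc hfuel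
      obtain ⟨hsub, hclosed, hndr⟩ := ih _ _ hnd' hss' hproc' hfuel'
      refine ⟨?_, hclosed, hndr⟩
      intro t ht
      refine hsub t ?_
      rw [pvPush_fold_fst, PySem.Set.mem_update]
      exact Or.inl ht

lemma pvReach_mem_iff (nbrs : String → List String) (U : List String)
    (hU : ∀ s m, m ∈ nbrs s → m ∈ U) (hUnd : U.Nodup)
    (fuel : Nat) (stack : List String) (seen : PySem.Set String)
    (hnd : seen.Nodup) (hss : ∀ s ∈ stack, s ∈ seen)
    (hproc : ∀ s ∈ seen, s ∉ stack → ∀ m ∈ nbrs s, m ∈ seen)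
    (hfuel : pvMeas U seen stack ≤ fuel) (t : String) :
    t ∈ pvReach nbrs fuel stack seen ↔ t ∈ seen ∨ ∃ s ∈ stack, pvNbrClosure nbrs s t := by
  constructor
  · exact fun h => pvReach_sound nbrs fuel stack seen t h
  · obtain ⟨hsub, hclosed, _⟩ :=
      pvReach_complete nbrs U hU hUnd fuel stack seen hnd hss hproc hfuel
    rintro (h | ⟨s, hs, hcl⟩)
    · exact hsub t h
    · have hbase : s ∈ pvReach nbrs fuel stack seen := hsub s (hss s hs)
      induction hcl with
      | refl => exact hbase
      | tail _ h2 ihc => exact hclosed _ ihc _ h2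

lemma pvAncLoop_eq_pvReach (rev : PySem.Dict String (PySem.Set String)) :
    ∀ (fuel : Nat) (stack : List String) (out : PySem.Set String),
    pvAncLoop rev fuel stack out =
      pvReach (fun n => (PySem.Dict.getD rev n PySem.Set.empty : List String)) fuel stack out := by
  intro fuel
  induction fuel with
  | zero => intro stack out; cases stack <;> rfl
  | succ fuel ih =>
    intro stack out
    cases stack with
    | nil => rfl
    | cons n st =>
      show pvAncLoop rev fuel _ _ = pvReach _ fuel _ _
      exact ih _ _

lemma pvFind_eq_pvReach (moral : PySem.Dict String (PySem.Set String)) (y : String)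
    (U : List String)
    (hU : ∀ s m, m ∈ (PySem.Dict.getD moral s PySem.Set.empty : List String) → m ∈ U)
    (hUnd : U.Nodup) :
    ∀ (fuel : Nat) (stack : List String) (seen : PySem.Set String),
    seen.Nodup → (∀ s ∈ stack, s ∈ seen) →
    (∀ s ∈ seen, s ∉ stack →
      ∀ m ∈ (PySem.Dict.getD moral s PySem.Set.empty : List String), m ∈ seen) →
    pvMeas U seen stack ≤ fuel → (y ∈ seen → y ∈ stack) →
    pvFindLoop moral y fuel stack seen =
      !(decide (y ∈ pvReach (fun n => (PySem.Dict.getD moral n PySem.Set.empty : List String))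
          fuel stack seen)) := by
  intro fuel
  induction fuel with
  | zero =>
    intro stack seen hnd hss hproc hfuel hy
    have hstack : stack = [] := by
      cases stack with
      | nil => rfl
      | cons a l => unfold pvMeas at hfuel; simp only [List.length_cons] at hfuel; omega
    subst hstack
    have hys : y ∉ seen := fun hc => by simpa using hy hc
    simp [pvFindLoop, pvReach, hys]
  | succ fuel ih =>
    intro stack seen hnd hss hproc hfuel hy
    cases stack with
    | nil =>
      have hys : y ∉ seen := fun hc => by simpa using hy hc
      simp [pvFindLoop, pvReach, hys]
    | cons n st =>
      by_cases hny : n = y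
      · subst hny
        have h1 : pvFindLoop moral n (fuel+1) (n :: st) seen = false := by
          simp [pvFindLoop]
        have h2 : n ∈ pvReach (fun n => (PySem.Dict.getD moral n PySem.Set.empty : List String))
            (fuel+1) (n :: st) seen := by
          exact (pvReach_complete _ U hU hUnd (fuel+1) (n :: st) seen hnd hss hproc hfuel).1
            n (hss n (List.mem_cons_self ..))
        rw [h1]
        symm
        simp only [Bool.not_eq_false', decide_eq_true_eq]
        exact h2
      · have h1 : pvFindLoop moral y (fuel+1) (n :: st) seen =
            pvFindLoop moral y fuel
              (((PySem.Dict.getD moral n PySem.Set.empty : List String)).foldl pvPush (seen, st)).2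
              (((PySem.Dict.getD moral n PySem.Set.empty : List String)).foldl pvPush (seen, st)).1 := by
          have : (n == y) = false := by simp [hny]
          simp only [pvFindLoop, this, Bool.false_eq_true, if_false]
          rfl
        rw [h1, pvReach_cons]
        obtain ⟨hnd', hss', hproc', hfuel'⟩ :=
          pvStep_invariants _ U hU hUnd fuel n st seen hnd hss hproc hfuel
        refine ih _ _ hnd' hss' hproc' hfuel' ?_
        intro hyf
        rw [pvPush_fold_fst, PySem.Set.mem_update] at hyf
        rw [pvPush_fold_snd_mem]
        by_cases hy2 : y ∈ seen
        · have := hy hy2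
          rcases List.mem_cons.mp this with h | h
          · exact absurd h.symm hny
          · exact Or.inl h
        · rcases hyf with h | h
          · exact absurd h hy2
          · exact Or.inr ⟨h, hy2⟩

-- dictionary characterizations ----------------------------------------------

lemma pvGetD_mem_values_flatten (d : PySem.Dict String (PySem.Set String)) (n v : String)
    (h : v ∈ (PySem.Dict.getD d n PySem.Set.empty : List String)) :
    v ∈ (PySem.Dict.values d).flatten := by
  rw [PySem.Dict.getD_eq_get?_getD] at h
  cases hg : PySem.Dict.get? d n with
  | none => rw [hg] at h; simp [PySem.Set.empty] at h
  | some s =>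
    rw [hg] at h
    have hs : s ∈ PySem.Dict.values d := by
      unfold PySem.Dict.get? at hg
      cases hf : List.find? (fun p => p.1 == n) d.items with
      | none => rw [hf] at hg; simp at hg
      | some p0 =>
        rw [hf] at hg
        simp only [Option.map_some, Option.some.injEq] at hg
        have hmem := List.mem_of_find?_eq_some hf
        rw [← hg]
        exact List.mem_map_of_mem hmem
    exact List.mem_flatten.mpr ⟨s, hs, h⟩

lemma pvRev0_getD (l : List (String × List String)) :
    ∀ d : PySem.Dict String (PySem.Set String),
    (∀ k, PySem.Dict.getD d k PySem.Set.empty = PySem.Set.empty) →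
    ∀ k, PySem.Dict.getD (l.foldl (fun d p => d.insert p.1 PySem.Set.empty) d) k
      PySem.Set.empty = PySem.Set.empty := by
  induction l with
  | nil => intro d h k; exact h k
  | cons p l ih =>
    intro d h k
    refine ih _ (fun k' => ?_) k
    rw [PySem.Dict.getD_insert]
    split
    · rfl
    · exact h k'

lemma pvRevStep_getD (d : PySem.Dict String (PySem.Set String)) (src dst k : String) :
    PySem.Dict.getD ((d.setdefault dst PySem.Set.empty).modify dst PySem.Set.empty
        (fun s => PySem.Set.add s src)) k PySem.Set.empty =
      if k = dst then PySem.Set.add (PySem.Dict.getD d dst PySem.Set.empty) src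
      else PySem.Dict.getD d k PySem.Set.empty := by
  rw [PySem.Dict.getD_modify]
  by_cases h : k = dst
  · subst h; rw [if_pos rfl, if_pos rfl, PySem.Dict.getD_setdefault_self]
  · rw [if_neg h, if_neg h, PySem.Dict.getD_eq_get?_getD,
      PySem.Dict.get?_setdefault_of_ne _ _ h, ← PySem.Dict.getD_eq_get?_getD]

lemma pvRevInner (src : String) (ds : List String) (n p : String) :
    ∀ d : PySem.Dict String (PySem.Set String),
    (p ∈ (PySem.Dict.getD (ds.foldl (fun d dst => (d.setdefault dst PySem.Set.empty).modify dst
        PySem.Set.empty (fun s => PySem.Set.add s src)) d) n PySem.Set.empty : List String) ↔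
      p ∈ (PySem.Dict.getD d n PySem.Set.empty : List String) ∨ (p = src ∧ n ∈ ds)) := by
  induction ds with
  | nil => simp
  | cons dst ds ih =>
    intro d
    rw [List.foldl_cons, ih, pvRevStep_getD]
    by_cases h : n = dst
    · subst h
      rw [if_pos rfl]
      simp only [PySem.Set.mem_add, List.mem_cons]
      tauto
    · rw [if_neg h]
      simp only [List.mem_cons]
      tauto

lemma pvRevOuter (l : List (String × List String)) (n p : String) :
    ∀ d : PySem.Dict String (PySem.Set String),
    (p ∈ (PySem.Dict.getD (l.foldl (fun d q => q.2.foldl (fun d dst =>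
        (d.setdefault dst PySem.Set.empty).modify dst PySem.Set.empty
          (fun s => PySem.Set.add s q.1)) d) d) n PySem.Set.empty : List String) ↔
      p ∈ (PySem.Dict.getD d n PySem.Set.empty : List String) ∨ ∃ q ∈ l, q.1 = p ∧ n ∈ q.2) := by
  induction l with
  | nil => simp
  | cons q l ih =>
    intro d
    rw [List.foldl_cons, ih, pvRevInner]
    simp only [List.mem_cons]
    constructor
    · rintro ((h | ⟨rfl, h2⟩) | ⟨q', hq', h1, h2⟩)
      · exact Or.inl h
      · exact Or.inr ⟨q, Or.inl rfl, rfl, h2⟩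
      · exact Or.inr ⟨q', Or.inr hq', h1, h2⟩
    · rintro (h | ⟨q', hq' | hq', h1, h2⟩)
      · exact Or.inl (Or.inl h)
      · subst hq'; exact Or.inl (Or.inr ⟨h1.symm, h2⟩)
      · exact Or.inr ⟨q', hq', h1, h2⟩

lemma pvParents_getD_mem (graph : List (String × List String)) (n p : String) :
    p ∈ (PySem.Dict.getD (pvParents graph) n PySem.Set.empty : List String) ↔
      pvEdge graph p n := by
  rw [show pvParents graph = graph.foldl (fun d q => q.2.foldl (fun d dst =>
      (d.setdefault dst PySem.Set.empty).modify dst PySem.Set.empty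
        (fun s => PySem.Set.add s q.1)) d)
      (graph.foldl (fun d p => d.insert p.1 PySem.Set.empty) PySem.Dict.empty) from rfl]
  rw [pvRevOuter]
  rw [pvRev0_getD graph PySem.Dict.empty (fun k => rfl) n]
  simp only [PySem.Set.empty, List.not_mem_nil, false_or]
  rfl

lemma pvParents_getD_nodup (graph : List (String × List String)) (n : String) :
    (PySem.Dict.getD (pvParents graph) n PySem.Set.empty : List String).Nodup := by
  rw [show pvParents graph = graph.foldl (fun d q => q.2.foldl (fun d dst =>
      (d.setdefault dst PySem.Set.empty).modify dst PySem.Set.empty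
        (fun s => PySem.Set.add s q.1)) d)
      (graph.foldl (fun d p => d.insert p.1 PySem.Set.empty) PySem.Dict.empty) from rfl]
  have base : ∀ k, (PySem.Dict.getD (graph.foldl (fun d p => d.insert p.1 PySem.Set.empty)
      PySem.Dict.empty) k PySem.Set.empty : List String).Nodup := by
    intro k; rw [pvRev0_getD graph PySem.Dict.empty (fun k => rfl) k]; exact List.nodup_nil
  revert base
  generalize (graph.foldl (fun d p => d.insert p.1 PySem.Set.empty) PySem.Dict.empty) = d0
  induction graph generalizing d0 n with
  | nil => intro h; exact h n
  | cons q l ih =>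
    intro h
    rw [List.foldl_cons]
    have inner : ∀ (ds : List String) (d0 : PySem.Dict String (PySem.Set String)),
        (∀ k, (PySem.Dict.getD d0 k PySem.Set.empty : List String).Nodup) →
        ∀ k, (PySem.Dict.getD (ds.foldl (fun d dst => (d.setdefault dst PySem.Set.empty).modify dst
          PySem.Set.empty (fun s => PySem.Set.add s q.1)) d0) k PySem.Set.empty : List String).Nodup := by
      intro ds
      induction ds with
      | nil => intro d0 h k; exact h k
      | cons dst ds ih2 =>
        intro d0 h k
        rw [List.foldl_cons]
        refine ih2 _ (fun k2 => ?_) k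
        rw [pvRevStep_getD]
        by_cases hk : k2 = dst
        · rw [if_pos hk]; exact PySem.Set.nodup_add _ _ (h dst)
        · rw [if_neg hk]; exact h k2
    exact ih _ _ (inner q.2 d0 h)

lemma pvClosure_congr {r s : String → String → Prop} (h : ∀ a b, r a b ↔ s a b)
    (a b : String) :
    Relation.ReflTransGen r a b ↔ Relation.ReflTransGen s a b :=
  ⟨Relation.ReflTransGen.mono (fun {u v} hr => (h u v).mp hr),
   Relation.ReflTransGen.mono (fun {u v} hr => (h u v).mpr hr)⟩

lemma pvRelevant_mem (graph : List (String × List String)) (x y : String) (z : List String)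
    (t : String) :
    t ∈ (pvAncestorsOfSet graph (PySem.Set.ofList (x :: y :: z)) : List String) ↔
      pvInAnc graph x y z t := by
  rw [show pvAncestorsOfSet graph (PySem.Set.ofList (x :: y :: z)) =
      pvAncLoop (pvParents graph)
        ((PySem.Set.ofList (x :: y :: z)).length +
          (PySem.Set.ofList ((PySem.Dict.values (pvParents graph)).flatten)).length)
        (PySem.Set.ofList (x :: y :: z)).reverse
        (PySem.Set.ofList (PySem.Set.ofList (x :: y :: z))) from rfl]
  rw [pvAncLoop_eq_pvReach, PySem.Set.ofList_ofList]
  have hfuel : pvMeas (PySem.Set.ofList ((PySem.Dict.values (pvParents graph)).flatten))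
      (PySem.Set.ofList (x :: y :: z)) (PySem.Set.ofList (x :: y :: z)).reverse ≤
      (PySem.Set.ofList (x :: y :: z)).length +
        (PySem.Set.ofList ((PySem.Dict.values (pvParents graph)).flatten)).length := by
    unfold pvMeas
    rw [List.length_reverse]
    have := List.length_filter_le (fun u => decide (u ∉ PySem.Set.ofList (x :: y :: z)))
      (PySem.Set.ofList ((PySem.Dict.values (pvParents graph)).flatten))
    omega
  rw [pvReach_mem_iff _ (PySem.Set.ofList ((PySem.Dict.values (pvParents graph)).flatten))
      (fun s m hm => (PySem.Set.mem_ofList _ _).mpr (pvGetD_mem_values_flatten _ _ _ hm))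
      (PySem.Set.nodup_ofList _) _ _ _ (PySem.Set.nodup_ofList _)
      (fun s hs => List.mem_reverse.mp hs)
      (fun s hs hns => absurd (List.mem_reverse.mpr hs) hns) hfuel t]
  have hcong : ∀ a b : String,
      (b ∈ (PySem.Dict.getD (pvParents graph) a PySem.Set.empty : List String)) ↔
        pvEdge graph b a := fun a b => pvParents_getD_mem graph a b
  unfold pvInAnc pvNbrClosure
  constructor
  · rintro (h | ⟨s, hs, hcl⟩)
    · rw [PySem.Set.mem_ofList] at h
      exact ⟨t, by simpa using h, Relation.ReflTransGen.refl⟩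
    · rw [List.mem_reverse, PySem.Set.mem_ofList] at hs
      exact ⟨s, by simpa using hs, (pvClosure_congr hcong s t).mp hcl⟩
  · rintro ⟨s, hs, hcl⟩
    right
    refine ⟨s, ?_, (pvClosure_congr hcong s t).mpr hcl⟩
    rw [List.mem_reverse, PySem.Set.mem_ofList]
    simpa using hs

-- staged views of pvMoralized (definitionally equal to its let-chain)
def pvRelevantD (graph : List (String × List String)) (x y : String) (z : List String) :
    PySem.Set String :=
  pvAncestorsOfSet graph (PySem.Set.ofList (x :: y :: z))

def pvSym (d : PySem.Dict String (PySem.Set String)) (a b : String) :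
    PySem.Dict String (PySem.Set String) :=
  (d.modify a PySem.Set.empty (fun s => PySem.Set.add s b)).modify b PySem.Set.empty
    (fun s => PySem.Set.add s a)

def pvUnd0D (graph : List (String × List String)) (x y : String) (z : List String) :
    PySem.Dict String (PySem.Set String) :=
  (pvRelevantD graph x y z).foldl (fun d node => d.insert node PySem.Set.empty) PySem.Dict.empty

def pvUnd1D (graph : List (String × List String)) (x y : String) (z : List String) :
    PySem.Dict String (PySem.Set String) :=
  (pvRelevantD graph x y z).foldl (fun d src =>
      ((List.lookup src graph).getD []).foldl (fun d dst =>
        if PySem.Set.contains (pvRelevantD graph x y z) dst then pvSym d src dst else d) d)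
    (pvUnd0D graph x y z)

def pvParsD (graph : List (String × List String)) (x y : String) (z : List String)
    (child : String) : List String :=
  PySem.List.sorted
    ((PySem.Dict.getD (pvParents graph) child PySem.Set.empty : List String).filter
      (fun par => PySem.Set.contains (pvRelevantD graph x y z) par)) (fun s => s) false

def pvUnd2D (graph : List (String × List String)) (x y : String) (z : List String) :
    PySem.Dict String (PySem.Set String) :=
  (pvRelevantD graph x y z).foldl (fun d child =>
      (PySem.List.combinations (pvParsD graph x y z child) 2).foldl (fun d c =>
        match c with
        | [a, b] => pvSym d a b
        | _ => d) d) (pvUnd1D graph x y z)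

def pvUnd3D (graph : List (String × List String)) (x y : String) (z : List String) :
    PySem.Dict String (PySem.Set String) :=
  z.foldl (fun d blocked => d.erase blocked) (pvUnd2D graph x y z)

lemma pvMoralized_eq (graph : List (String × List String)) (x y : String) (z : List String) :
    pvMoralized graph x y z =
      (PySem.Dict.keys (pvUnd3D graph x y z)).foldl
        (fun d node => d.modify node PySem.Set.empty (fun s => PySem.Set.diff s z))
        (pvUnd3D graph x y z) := rfl

lemma pvSym_getD_mem (d : PySem.Dict String (PySem.Set String)) (a b k v : String) :
    v ∈ (PySem.Dict.getD (pvSym d a b) k PySem.Set.empty : List String) ↔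
      v ∈ (PySem.Dict.getD d k PySem.Set.empty : List String) ∨
        (k = a ∧ v = b) ∨ (k = b ∧ v = a) := by
  unfold pvSym
  by_cases hkb : k = b <;> by_cases hka : k = a <;> by_cases hba : b = a <;>
    simp_all [PySem.Dict.getD_modify, PySem.Set.mem_add] <;> tauto

lemma pvSym_contains (d : PySem.Dict String (PySem.Set String)) (a b k : String) :
    (pvSym d a b).contains k = true ↔ k = a ∨ k = b ∨ d.contains k = true := by
  unfold pvSym
  rw [PySem.Dict.contains_modify, PySem.Dict.contains_modify]
  simp only [Bool.or_eq_true, beq_iff_eq]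
  tauto

lemma pvCombFold_getD (cs : List (List String)) (u v : String) :
    ∀ d : PySem.Dict String (PySem.Set String),
    (v ∈ (PySem.Dict.getD (cs.foldl (fun d c =>
        match c with
        | [a, b] => pvSym d a b
        | _ => d) d) u PySem.Set.empty : List String) ↔
      v ∈ (PySem.Dict.getD d u PySem.Set.empty : List String) ∨
        ∃ a b, [a, b] ∈ cs ∧ ((u = a ∧ v = b) ∨ (u = b ∧ v = a))) := by
  induction cs with
  | nil => simp
  | cons c cs ih =>
    intro d
    rw [List.foldl_cons, ih]
    have hstep : ∀ d' : PySem.Dict String (PySem.Set String),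
        (v ∈ (PySem.Dict.getD (match c with
            | [a, b] => pvSym d' a b
            | _ => d') u PySem.Set.empty : List String) ↔
          v ∈ (PySem.Dict.getD d' u PySem.Set.empty : List String) ∨
            ∃ a b, c = [a, b] ∧ ((u = a ∧ v = b) ∨ (u = b ∧ v = a))) := by
      intro d'
      match c with
      | [] => simp
      | [a] => simp
      | [a, b] =>
        rw [pvSym_getD_mem]
        constructor
        · rintro (h | h | h)
          · exact Or.inl h
          · exact Or.inr ⟨a, b, rfl, Or.inl h⟩
          · exact Or.inr ⟨a, b, rfl, Or.inr h⟩
        · rintro (h | ⟨a', b', heq, hm⟩)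
          · exact Or.inl h
          · obtain ⟨rfl, rfl⟩ : a' = a ∧ b' = b := by
              constructor <;> [injection heq with h1 _; skip]
              · exact h1.symm
              · injection heq with _ h2; injection h2 with h2 _; exact h2.symm
            tauto
      | a :: b :: c :: rest => simp
    rw [hstep]
    constructor
    · rintro ((h | ⟨a, b, rfl, hm⟩) | ⟨a, b, hab, hm⟩)
      · exact Or.inl h
      · exact Or.inr ⟨a, b, List.mem_cons_self .., hm⟩
      · exact Or.inr ⟨a, b, List.mem_cons_of_mem _ hab, hm⟩
    · rintro (h | ⟨a, b, hab, hm⟩)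
      · exact Or.inl (Or.inl h)
      · rcases List.mem_cons.mp hab with rfl | hab'
        · exact Or.inl (Or.inr ⟨a, b, rfl, hm⟩)
        · exact Or.inr ⟨a, b, hab', hm⟩

lemma pvUnd1Inner_getD (R : PySem.Set String) (src : String) (ds : List String) (u v : String) :
    ∀ d : PySem.Dict String (PySem.Set String),
    (v ∈ (PySem.Dict.getD (ds.foldl (fun d dst =>
        if PySem.Set.contains R dst then pvSym d src dst else d) d) u PySem.Set.empty : List String) ↔
      v ∈ (PySem.Dict.getD d u PySem.Set.empty : List String) ∨
        ∃ dst ∈ ds, dst ∈ R ∧ ((u = src ∧ v = dst) ∨ (u = dst ∧ v = src))) := by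
  induction ds with
  | nil => simp
  | cons dst ds ih =>
    intro d
    rw [List.foldl_cons]
    by_cases h : dst ∈ R
    · have hc : PySem.Set.contains R dst = true := by
        simpa [PySem.Set.contains_iff] using h
      rw [hc, if_pos rfl, ih, pvSym_getD_mem]
      simp only [List.mem_cons]
      constructor
      · rintro ((h1 | h1 | h1) | ⟨dst', h1, h2, h3⟩)
        · exact Or.inl h1
        · exact Or.inr ⟨dst, Or.inl rfl, h, Or.inl h1⟩
        · exact Or.inr ⟨dst, Or.inl rfl, h, Or.inr h1⟩
        · exact Or.inr ⟨dst', Or.inr h1, h2, h3⟩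
      · rintro (h1 | ⟨dst', rfl | h1, h2, h3⟩)
        · exact Or.inl (Or.inl h1)
        · exact Or.inl (Or.inr h3)
        · exact Or.inr ⟨dst', h1, h2, h3⟩
    · have hc : PySem.Set.contains R dst = false := by
        simp [h]
      rw [hc]
      simp only [Bool.false_eq_true, if_false]
      rw [ih]
      simp only [List.mem_cons]
      constructor
      · rintro (h1 | ⟨dst', h1, h2, h3⟩)
        · exact Or.inl h1
        · exact Or.inr ⟨dst', Or.inr h1, h2, h3⟩
      · rintro (h1 | ⟨dst', rfl | h1, h2, h3⟩)
        · exact Or.inl h1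
        · exact absurd h2 h
        · exact Or.inr ⟨dst', h1, h2, h3⟩

lemma pvUnd1Outer_getD (R : PySem.Set String) (graph : List (String × List String))
    (l : List String) (u v : String) :
    ∀ d : PySem.Dict String (PySem.Set String),
    (v ∈ (PySem.Dict.getD (l.foldl (fun d src =>
        ((List.lookup src graph).getD []).foldl (fun d dst =>
          if PySem.Set.contains R dst then pvSym d src dst else d) d) d) u PySem.Set.empty : List String) ↔
      v ∈ (PySem.Dict.getD d u PySem.Set.empty : List String) ∨
        ∃ src ∈ l, ∃ dst ∈ (List.lookup src graph).getD [], dst ∈ R ∧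
          ((u = src ∧ v = dst) ∨ (u = dst ∧ v = src))) := by
  induction l with
  | nil => simp
  | cons src l ih =>
    intro d
    rw [List.foldl_cons, ih, pvUnd1Inner_getD]
    simp only [List.mem_cons]
    constructor
    · rintro ((h1 | ⟨dst, h1, h2, h3⟩) | ⟨src', h1, hrest⟩)
      · exact Or.inl h1
      · exact Or.inr ⟨src, Or.inl rfl, dst, h1, h2, h3⟩
      · exact Or.inr ⟨src', Or.inr h1, hrest⟩
    · rintro (h1 | ⟨src', rfl | h1, hrest⟩)
      · exact Or.inl (Or.inl h1)
      · exact Or.inl (Or.inr hrest)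
      · exact Or.inr ⟨src', h1, hrest⟩

lemma pvUnd2Outer_getD (graph : List (String × List String)) (x y : String) (z : List String)
    (l : List String) (u v : String) :
    ∀ d : PySem.Dict String (PySem.Set String),
    (v ∈ (PySem.Dict.getD (l.foldl (fun d child =>
        (PySem.List.combinations (pvParsD graph x y z child) 2).foldl (fun d c =>
          match c with
          | [a, b] => pvSym d a b
          | _ => d) d) d) u PySem.Set.empty : List String) ↔
      v ∈ (PySem.Dict.getD d u PySem.Set.empty : List String) ∨
        ∃ child ∈ l, ∃ a b, [a, b] ∈ PySem.List.combinations (pvParsD graph x y z child) 2 ∧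
          ((u = a ∧ v = b) ∨ (u = b ∧ v = a))) := by
  induction l with
  | nil => simp
  | cons child l ih =>
    intro d
    rw [List.foldl_cons, ih, pvCombFold_getD]
    simp only [List.mem_cons]
    constructor
    · rintro ((h1 | ⟨a, b, h1, h2⟩) | ⟨c', h1, hrest⟩)
      · exact Or.inl h1
      · exact Or.inr ⟨child, Or.inl rfl, a, b, h1, h2⟩
      · exact Or.inr ⟨c', Or.inr h1, hrest⟩
    · rintro (h1 | ⟨c', rfl | h1, hrest⟩)
      · exact Or.inl (Or.inl h1)
      · exact Or.inl (Or.inr hrest)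
      · exact Or.inr ⟨c', h1, hrest⟩

lemma pvParsD_mem (graph : List (String × List String)) (x y : String) (z : List String)
    (child p : String) :
    p ∈ pvParsD graph x y z child ↔
      pvEdge graph p child ∧ p ∈ pvRelevantD graph x y z := by
  unfold pvParsD
  rw [PySem.List.mem_sorted, List.mem_filter, pvParents_getD_mem]
  simp

lemma pvParsD_nodup (graph : List (String × List String)) (x y : String) (z : List String)
    (child : String) : (pvParsD graph x y z child).Nodup := by
  unfold pvParsD
  have h1 : ((PySem.Dict.getD (pvParents graph) child PySem.Set.empty : List String).filter
      (fun par => PySem.Set.contains (pvRelevantD graph x y z) par)).Nodup :=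
    (pvParents_getD_nodup graph child).filter _
  exact ((PySem.List.sorted_perm
    ((PySem.Dict.getD (pvParents graph) child PySem.Set.empty : List String).filter
      (fun par => PySem.Set.contains (pvRelevantD graph x y z) par))
    (fun s => s) false).nodup_iff).mpr h1

lemma pvTwoSublist (l : List String) (u v : String) (hu : u ∈ l) (hv : v ∈ l) (hne : u ≠ v) :
    [u, v].Sublist l ∨ [v, u].Sublist l := by
  induction l with
  | nil => cases hu
  | cons a l ih =>
    rcases List.mem_cons.mp hu with rfl | hu'
    · have hv' : v ∈ l := by
        rcases List.mem_cons.mp hv with h | h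
        · exact absurd h.symm hne
        · exact h
      exact Or.inl ((List.singleton_sublist.mpr hv').cons₂ u)
    · rcases List.mem_cons.mp hv with rfl | hv'
      · exact Or.inr ((List.singleton_sublist.mpr hu').cons₂ v)
      · rcases ih hu' hv' with h | h
        · exact Or.inl (h.cons a)
        · exact Or.inr (h.cons a)

lemma pvPair_iff (pars : List String) (hnd : pars.Nodup) (u v : String) :
    (∃ a b, [a, b] ∈ PySem.List.combinations pars 2 ∧
        ((u = a ∧ v = b) ∨ (u = b ∧ v = a))) ↔
      (u ∈ pars ∧ v ∈ pars ∧ u ≠ v) := by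
  constructor
  · rintro ⟨a, b, hab, hm⟩
    have hsub := ((PySem.List.mem_combinations_iff pars 2 [a, b]).mp hab).1
    have hmema : a ∈ pars := hsub.subset (by simp)
    have hmemb : b ∈ pars := hsub.subset (by simp)
    have hpairnd : ([a, b] : List String).Nodup := hnd.sublist hsub
    have hne : a ≠ b := by simpa using hpairnd
    rcases hm with ⟨rfl, rfl⟩ | ⟨rfl, rfl⟩
    · exact ⟨hmema, hmemb, hne⟩
    · exact ⟨hmemb, hmema, fun hc => hne hc.symm⟩
  · rintro ⟨hu, hv, hne⟩
    rcases pvTwoSublist pars u v hu hv hne with h | h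
    · exact ⟨u, v, (PySem.List.mem_combinations_iff pars 2 [u, v]).mpr ⟨h, rfl⟩,
        Or.inl ⟨rfl, rfl⟩⟩
    · exact ⟨v, u, (PySem.List.mem_combinations_iff pars 2 [v, u]).mpr ⟨h, rfl⟩,
        Or.inr ⟨rfl, rfl⟩⟩

lemma pvErase_get? {ν : Type} (d : PySem.Dict String ν) (k j : String) :
    (d.erase k).get? j = if j = k then none else d.get? j := by
  rcases d with ⟨items⟩
  unfold PySem.Dict.erase PySem.Dict.get?
  simp only
  induction items with
  | nil => simp
  | cons p rest ih =>
    simp only [List.filter_cons]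
    by_cases hpk : p.1 = k
    · have h1 : (!(p.1 == k)) = false := by simp [hpk]
      rw [h1]
      simp only [Bool.false_eq_true, if_false]
      rw [ih]
      by_cases hjk : j = k
      · rw [if_pos hjk, if_pos hjk]
      · rw [if_neg hjk, if_neg hjk,
          List.find?_cons_of_neg (by simp [hpk]; exact fun hc => hjk hc.symm)]
    · have h1 : (!(p.1 == k)) = true := by simp [hpk]
      rw [h1]
      simp only [if_true]
      by_cases hpj : p.1 = j
      · have hjk : ¬ j = k := fun hc => hpk (hpj.trans hc)
        rw [List.find?_cons_of_pos (by simp [hpj]), if_neg hjk,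
          List.find?_cons_of_pos (by simp [hpj])]
      · rw [List.find?_cons_of_neg (by simp [hpj]), ih]
        by_cases hjk : j = k
        · rw [if_pos hjk, if_pos hjk]
        · rw [if_neg hjk, if_neg hjk, List.find?_cons_of_neg (by simp [hpj])]

lemma pvEraseFold_get? {ν : Type} (zs : List String) (j : String) :
    ∀ d : PySem.Dict String ν,
    (zs.foldl (fun d b => d.erase b) d).get? j = if j ∈ zs then none else d.get? j := by
  induction zs with
  | nil => simp
  | cons b zs ih =>
    intro d
    rw [List.foldl_cons, ih]
    by_cases hjz : j ∈ zs
    · rw [if_pos hjz, if_pos (List.mem_cons_of_mem _ hjz)]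
    · rw [if_neg hjz, pvErase_get?]
      by_cases hjb : j = b
      · rw [if_pos hjb, if_pos (List.mem_cons.mpr (Or.inl hjb))]
      · rw [if_neg hjb, if_neg]
        simp [hjb, hjz]

lemma pvRelevant_nodup (graph : List (String × List String)) (x y : String) (z : List String) :
    (pvRelevantD graph x y z : List String).Nodup := by
  unfold pvRelevantD
  rw [show pvAncestorsOfSet graph (PySem.Set.ofList (x :: y :: z)) =
      pvAncLoop (pvParents graph)
        ((PySem.Set.ofList (x :: y :: z)).length +
          (PySem.Set.ofList ((PySem.Dict.values (pvParents graph)).flatten)).length)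
        (PySem.Set.ofList (x :: y :: z)).reverse
        (PySem.Set.ofList (PySem.Set.ofList (x :: y :: z))) from rfl]
  rw [pvAncLoop_eq_pvReach, PySem.Set.ofList_ofList]
  have hfuel : pvMeas (PySem.Set.ofList ((PySem.Dict.values (pvParents graph)).flatten))
      (PySem.Set.ofList (x :: y :: z)) (PySem.Set.ofList (x :: y :: z)).reverse ≤
      (PySem.Set.ofList (x :: y :: z)).length +
        (PySem.Set.ofList ((PySem.Dict.values (pvParents graph)).flatten)).length := by
    unfold pvMeas
    rw [List.length_reverse]
    have := List.length_filter_le (fun u => decide (u ∉ PySem.Set.ofList (x :: y :: z)))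
      (PySem.Set.ofList ((PySem.Dict.values (pvParents graph)).flatten))
    omega
  exact (pvReach_complete _ (PySem.Set.ofList ((PySem.Dict.values (pvParents graph)).flatten))
      (fun s m hm => (PySem.Set.mem_ofList _ _).mpr (pvGetD_mem_values_flatten _ _ _ hm))
      (PySem.Set.nodup_ofList _) _ _ _ (PySem.Set.nodup_ofList _)
      (fun s hs => List.mem_reverse.mp hs)
      (fun s hs hns => absurd (List.mem_reverse.mpr hs) hns) hfuel).2.2

lemma pvUnd0_keys (graph : List (String × List String)) (x y : String) (z : List String) :
    (pvUnd0D graph x y z).keys = pvRelevantD graph x y z := by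
  unfold pvUnd0D
  rw [PySem.Dict.keys_foldl_insert _ (fun _ _ => PySem.Set.empty), PySem.Dict.keys_empty,
    PySem.Set.update_nil_left, PySem.Set.ofList_eq_self_of_nodup _ (pvRelevant_nodup graph x y z)]

lemma pvUnd0_contains (graph : List (String × List String)) (x y : String) (z : List String)
    (k : String) :
    (pvUnd0D graph x y z).contains k = true ↔ k ∈ pvRelevantD graph x y z := by
  rw [PySem.Dict.contains_iff_mem_keys, pvUnd0_keys]

lemma pvUnd1_contains (graph : List (String × List String)) (x y : String) (z : List String)
    (k : String) :
    (pvUnd1D graph x y z).contains k = true ↔ k ∈ pvRelevantD graph x y z := by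
  unfold pvUnd1D
  have main : ∀ (l : List String), (∀ s ∈ l, s ∈ pvRelevantD graph x y z) →
      ∀ d : PySem.Dict String (PySem.Set String),
      (∀ k, d.contains k = true ↔ k ∈ pvRelevantD graph x y z) →
      ∀ k, ((l.foldl (fun d src => ((List.lookup src graph).getD []).foldl (fun d dst =>
          if PySem.Set.contains (pvRelevantD graph x y z) dst then pvSym d src dst else d) d) d).contains k
        = true ↔ k ∈ pvRelevantD graph x y z) := by
    intro l
    induction l with
    | nil => intro _ d h k; exact h k
    | cons src l ih =>
      intro hl d h k
      rw [List.foldl_cons]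
      have hsrc : src ∈ pvRelevantD graph x y z := hl src (List.mem_cons_self ..)
      have inner : ∀ (ds : List String) (d : PySem.Dict String (PySem.Set String)),
          (∀ k, d.contains k = true ↔ k ∈ pvRelevantD graph x y z) →
          ∀ k, ((ds.foldl (fun d dst =>
              if PySem.Set.contains (pvRelevantD graph x y z) dst then pvSym d src dst else d) d).contains k
            = true ↔ k ∈ pvRelevantD graph x y z) := by
        intro ds
        induction ds with
        | nil => intro d h k; exact h k
        | cons dst ds ih2 =>
          intro d h k
          rw [List.foldl_cons]
          by_cases hrel : dst ∈ pvRelevantD graph x y z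
          · have hc : PySem.Set.contains (pvRelevantD graph x y z) dst = true := by
              simpa [PySem.Set.contains_iff] using hrel
            rw [hc, if_pos rfl]
            refine ih2 _ (fun k2 => ?_) k
            rw [pvSym_contains]
            constructor
            · rintro (rfl | rfl | hk)
              · exact hsrc
              · exact hrel
              · exact (h k2).mp hk
            · intro hk; exact Or.inr (Or.inr ((h k2).mpr hk))
          · have hc : PySem.Set.contains (pvRelevantD graph x y z) dst = false := by
              simp [hrel]
            rw [hc]
            simp only [Bool.false_eq_true, if_false]
            exact ih2 _ h k
      exact ih (fun s hs => hl s (List.mem_cons_of_mem _ hs)) _ (inner _ d h) k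
  exact main _ (fun s hs => hs) _ (fun k => pvUnd0_contains graph x y z k) k

lemma pvUnd2_contains (graph : List (String × List String)) (x y : String) (z : List String)
    (k : String) :
    (pvUnd2D graph x y z).contains k = true ↔ k ∈ pvRelevantD graph x y z := by
  unfold pvUnd2D
  have main : ∀ (l : List String),
      ∀ d : PySem.Dict String (PySem.Set String),
      (∀ k, d.contains k = true ↔ k ∈ pvRelevantD graph x y z) →
      ∀ k, ((l.foldl (fun d child =>
          (PySem.List.combinations (pvParsD graph x y z child) 2).foldl (fun d c =>
            match c with
            | [a, b] => pvSym d a b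
            | _ => d) d) d).contains k = true ↔ k ∈ pvRelevantD graph x y z) := by
    intro l
    induction l with
    | nil => intro d h k; exact h k
    | cons child l ih =>
      intro d h k
      rw [List.foldl_cons]
      have inner : ∀ (cs : List (List String)),
          (∀ c ∈ cs, ∀ a ∈ c, a ∈ pvRelevantD graph x y z) →
          ∀ d : PySem.Dict String (PySem.Set String),
          (∀ k, d.contains k = true ↔ k ∈ pvRelevantD graph x y z) →
          ∀ k, ((cs.foldl (fun d c =>
              match c with
              | [a, b] => pvSym d a b
              | _ => d) d).contains k = true ↔ k ∈ pvRelevantD graph x y z) := by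
        intro cs
        induction cs with
        | nil => intro _ d h k; exact h k
        | cons c cs ih2 =>
          intro hcs d h k
          rw [List.foldl_cons]
          refine ih2 (fun c' hc' a ha => hcs c' (List.mem_cons_of_mem _ hc') a ha) _ ?_ k
          match c, hcs with
          | [], _ => exact h
          | [a], _ => exact h
          | [a, b], hcs =>
            intro k2
            rw [pvSym_contains]
            have ha := hcs [a, b] (List.mem_cons_self ..) a (by simp)
            have hb := hcs [a, b] (List.mem_cons_self ..) b (by simp)
            constructor
            · rintro (rfl | rfl | hk)
              · exact ha
              · exact hb
              · exact (h k2).mp hk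
            · intro hk; exact Or.inr (Or.inr ((h k2).mpr hk))
          | a :: b :: c' :: rest, _ => exact h
      have hcomb : ∀ c ∈ PySem.List.combinations (pvParsD graph x y z child) 2,
          ∀ a ∈ c, a ∈ pvRelevantD graph x y z := by
        intro c hc a ha
        have hsub := ((PySem.List.mem_combinations_iff _ 2 c).mp hc).1
        exact ((pvParsD_mem graph x y z child a).mp (hsub.subset ha)).2
      exact ih _ (inner _ hcomb d h) k
  exact main _ _ (fun k => pvUnd1_contains graph x y z k) k

lemma pvInsFold_getD (l : List String) :
    ∀ d : PySem.Dict String (PySem.Set String),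
    (∀ k, PySem.Dict.getD d k PySem.Set.empty = PySem.Set.empty) →
    ∀ k, PySem.Dict.getD (l.foldl (fun d node => d.insert node PySem.Set.empty) d) k
      PySem.Set.empty = PySem.Set.empty := by
  induction l with
  | nil => intro d h k; exact h k
  | cons n l ih =>
    intro d h k
    rw [List.foldl_cons]
    refine ih _ (fun k2 => ?_) k
    rw [PySem.Dict.getD_insert]
    split
    · rfl
    · exact h k2

lemma pvUnd0_getD (graph : List (String × List String)) (x y : String) (z : List String)
    (k : String) :
    PySem.Dict.getD (pvUnd0D graph x y z) k PySem.Set.empty = PySem.Set.empty := by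
  unfold pvUnd0D
  exact pvInsFold_getD _ _ (fun k => rfl) k

lemma pvUnd1_getD_mem (graph : List (String × List String)) (x y : String) (z : List String)
    (u v : String) :
    v ∈ (PySem.Dict.getD (pvUnd1D graph x y z) u PySem.Set.empty : List String) ↔
      ∃ src ∈ pvRelevantD graph x y z, ∃ dst ∈ (List.lookup src graph).getD [],
        dst ∈ pvRelevantD graph x y z ∧ ((u = src ∧ v = dst) ∨ (u = dst ∧ v = src)) := by
  unfold pvUnd1D
  rw [pvUnd1Outer_getD, pvUnd0_getD]
  simp [PySem.Set.empty]

lemma pvUnd2_getD_mem (graph : List (String × List String)) (x y : String) (z : List String)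
    (u v : String) :
    v ∈ (PySem.Dict.getD (pvUnd2D graph x y z) u PySem.Set.empty : List String) ↔
      v ∈ (PySem.Dict.getD (pvUnd1D graph x y z) u PySem.Set.empty : List String) ∨
        ∃ child ∈ pvRelevantD graph x y z,
          u ∈ pvParsD graph x y z child ∧ v ∈ pvParsD graph x y z child ∧ u ≠ v := by
  unfold pvUnd2D
  rw [pvUnd2Outer_getD]
  constructor
  · rintro (h | ⟨child, hc, hpair⟩)
    · exact Or.inl h
    · exact Or.inr ⟨child, hc, (pvPair_iff _ (pvParsD_nodup graph x y z child) u v).mp hpair⟩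
  · rintro (h | ⟨child, hc, hpair⟩)
    · exact Or.inl h
    · exact Or.inr ⟨child, hc, (pvPair_iff _ (pvParsD_nodup graph x y z child) u v).mpr hpair⟩

lemma pvFoldPreserve {β : Type} (P : PySem.Dict String (PySem.Set String) → Prop)
    (f : PySem.Dict String (PySem.Set String) → β → PySem.Dict String (PySem.Set String))
    (hf : ∀ d b, P d → P (f d b)) :
    ∀ (l : List β) (d : PySem.Dict String (PySem.Set String)), P d → P (l.foldl f d) := by
  intro l
  induction l with
  | nil => exact fun d h => h
  | cons b l ih =>
    intro d h
    rw [List.foldl_cons]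
    exact ih _ (hf d b h)

lemma pvSym_keys_nodup (d : PySem.Dict String (PySem.Set String)) (a b : String)
    (h : d.keys.Nodup) : (pvSym d a b).keys.Nodup := by
  unfold pvSym
  have h1 : ((d.modify a PySem.Set.empty (fun s => PySem.Set.add s b)).keys).Nodup := by
    rw [PySem.Dict.keys_modify]
    exact PySem.Dict.nodup_keys_insert _ _ _ h
  rw [PySem.Dict.keys_modify]
  exact PySem.Dict.nodup_keys_insert _ _ _ h1

lemma pvUnd2_keys_nodup (graph : List (String × List String)) (x y : String) (z : List String) :
    (pvUnd2D graph x y z).keys.Nodup := by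
  have h0 : (pvUnd0D graph x y z).keys.Nodup := by
    rw [pvUnd0_keys]; exact pvRelevant_nodup graph x y z
  have h1 : (pvUnd1D graph x y z).keys.Nodup := by
    unfold pvUnd1D
    refine pvFoldPreserve (fun d => d.keys.Nodup) _ (fun d src h => ?_) _ _ h0
    refine pvFoldPreserve (fun d => d.keys.Nodup) _ (fun d dst h => ?_) _ _ h
    split
    · exact pvSym_keys_nodup _ _ _ h
    · exact h
  unfold pvUnd2D
  refine pvFoldPreserve (fun d => d.keys.Nodup) _ (fun d child h => ?_) _ _ h1
  refine pvFoldPreserve (fun d => d.keys.Nodup) _ (fun d c h => ?_) _ _ h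
  match c with
  | [] => exact h
  | [a] => exact h
  | [a, b] => exact pvSym_keys_nodup _ _ _ h
  | a :: b :: c' :: rest => exact h

lemma pvErase_keys_sublist (d : PySem.Dict String (PySem.Set String)) (k : String) :
    (d.erase k).keys.Sublist d.keys := by
  unfold PySem.Dict.erase PySem.Dict.keys
  exact List.filter_sublist.map _

lemma pvUnd3_keys_nodup (graph : List (String × List String)) (x y : String) (z : List String) :
    (pvUnd3D graph x y z).keys.Nodup := by
  unfold pvUnd3D
  refine pvFoldPreserve (fun d => d.keys.Nodup) _ (fun d b h => ?_) _ _
    (pvUnd2_keys_nodup graph x y z)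
  exact h.sublist (pvErase_keys_sublist d b)

lemma pvUnd3_contains (graph : List (String × List String)) (x y : String) (z : List String)
    (k : String) :
    (pvUnd3D graph x y z).contains k = true ↔ k ∈ pvRelevantD graph x y z ∧ k ∉ z := by
  unfold pvUnd3D
  rw [PySem.Dict.contains_eq_isSome_get?, pvEraseFold_get?]
  by_cases hz : k ∈ z
  · simp [hz]
  · rw [if_neg hz, ← PySem.Dict.contains_eq_isSome_get?, pvUnd2_contains]
    simp [hz]

lemma pvUnd3_getD (graph : List (String × List String)) (x y : String) (z : List String)
    (u : String) :
    PySem.Dict.getD (pvUnd3D graph x y z) u PySem.Set.empty =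
      if u ∈ z then PySem.Set.empty
      else PySem.Dict.getD (pvUnd2D graph x y z) u PySem.Set.empty := by
  unfold pvUnd3D
  rw [PySem.Dict.getD_eq_get?_getD, pvEraseFold_get?]
  by_cases hz : u ∈ z
  · simp [hz]
  · rw [if_neg hz, if_neg hz, ← PySem.Dict.getD_eq_get?_getD]

lemma pvDiffFold_getD (zs : List String) (u v : String) :
    ∀ (ks : List String), ks.Nodup →
    ∀ d : PySem.Dict String (PySem.Set String),
    (v ∈ (PySem.Dict.getD (ks.foldl (fun d node => d.modify node PySem.Set.empty
        (fun s => PySem.Set.diff s zs)) d) u PySem.Set.empty : List String) ↔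
      v ∈ (PySem.Dict.getD d u PySem.Set.empty : List String) ∧ (u ∈ ks → v ∉ zs)) := by
  intro ks
  induction ks with
  | nil => intro _ d; simp
  | cons k0 ks ih =>
    intro hnd d
    rw [List.foldl_cons, ih (List.nodup_cons.mp hnd).2, PySem.Dict.getD_modify]
    by_cases hu : u = k0
    · subst hu
      have hks : u ∉ ks := (List.nodup_cons.mp hnd).1
      rw [if_pos rfl]
      simp only [PySem.Set.mem_diff, List.mem_cons]
      constructor
      · rintro ⟨⟨h1, h2⟩, _⟩
        exact ⟨h1, fun _ => h2⟩
      · rintro ⟨h1, h2⟩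
        exact ⟨⟨h1, h2 (by simp)⟩, fun hc => absurd hc hks⟩
    · rw [if_neg hu]
      simp only [List.mem_cons]
      constructor
      · rintro ⟨h1, h2⟩
        exact ⟨h1, fun hc => h2 (hc.resolve_left hu)⟩
      · rintro ⟨h1, h2⟩
        exact ⟨h1, fun hc => h2 (Or.inr hc)⟩

lemma pvDiffFold_contains (zs : List String) (k : String) :
    ∀ (ks : List String) (d : PySem.Dict String (PySem.Set String)),
    ((ks.foldl (fun d node => d.modify node PySem.Set.empty
        (fun s => PySem.Set.diff s zs)) d).contains k = true ↔
      k ∈ ks ∨ d.contains k = true) := by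
  intro ks
  induction ks with
  | nil => intro d; simp
  | cons k0 ks ih =>
    intro d
    rw [List.foldl_cons, ih, PySem.Dict.contains_modify]
    simp only [List.mem_cons, Bool.or_eq_true, beq_iff_eq]
    tauto

lemma pvLookup_mem : ∀ (graph : List (String × List String)),
    (graph.map Prod.fst).Nodup →
    ∀ (n c : String), (c ∈ (List.lookup n graph).getD [] ↔ pvEdge graph n c) := by
  intro graph
  induction graph with
  | nil => intro _ n c; simp [pvEdge]
  | cons p l ih =>
    intro hPre n c
    rw [List.map_cons, List.nodup_cons] at hPre
    obtain ⟨hp, hl⟩ := hPre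
    by_cases hn : p.1 = n
    · have hlk : List.lookup n (p :: l) = some p.2 := by
        rcases p with ⟨p1, p2⟩
        simp only at hn
        simp [List.lookup, hn]
      rw [hlk]
      simp only [Option.getD_some]
      constructor
      · intro h
        exact ⟨p, List.mem_cons_self .., hn, h⟩
      · rintro ⟨q, hq, hq1, hq2⟩
        rcases List.mem_cons.mp hq with rfl | hq'
        · exact hq2
        · exfalso
          apply hp
          rw [hn, ← hq1]
          exact List.mem_map_of_mem hq'
    · have hlk : List.lookup n (p :: l) = List.lookup n l := by
        rcases p with ⟨p1, p2⟩
        simp only at hn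
        have hb : (n == p1) = false := by
          simp only [beq_eq_false_iff_ne, ne_eq]
          exact fun hc => hn hc.symm
        show (match n == p1 with
          | true => some p2
          | false => List.lookup n l) = List.lookup n l
        rw [hb]
      rw [hlk, ih hl]
      unfold pvEdge
      constructor
      · rintro ⟨q, hq, h1, h2⟩
        exact ⟨q, List.mem_cons_of_mem _ hq, h1, h2⟩
      · rintro ⟨q, hq, h1, h2⟩
        rcases List.mem_cons.mp hq with rfl | hq'
        · exact absurd h1 hn
        · exact ⟨q, hq', h1, h2⟩

lemma pvRelevantD_mem (graph : List (String × List String)) (x y : String) (z : List String)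
    (t : String) :
    t ∈ (pvRelevantD graph x y z : List String) ↔ pvInAnc graph x y z t :=
  pvRelevant_mem graph x y z t

lemma pvMoral_contains (graph : List (String × List String)) (x y : String) (z : List String)
    (u : String) :
    (pvMoralized graph x y z).contains u = true ↔ pvInAnc graph x y z u ∧ u ∉ z := by
  rw [pvMoralized_eq, pvDiffFold_contains, ← PySem.Dict.contains_iff_mem_keys,
    pvUnd3_contains, pvRelevantD_mem]
  tauto

lemma pvMoral_getD_mem (graph : List (String × List String)) (x y : String) (z : List String)
    (hPre : (graph.map Prod.fst).Nodup) (u v : String) :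
    v ∈ (PySem.Dict.getD (pvMoralized graph x y z) u PySem.Set.empty : List String) ↔
      pvStepA graph x y z u v := by
  unfold pvStepA pvLive pvAdj
  rw [pvMoralized_eq,
    pvDiffFold_getD z u v (PySem.Dict.keys (pvUnd3D graph x y z)) (pvUnd3_keys_nodup graph x y z),
    pvUnd3_getD, ← PySem.Dict.contains_iff_mem_keys, pvUnd3_contains]
  by_cases hu : u ∈ z
  · rw [if_pos hu]
    constructor
    · rintro ⟨h, _⟩
      simp [PySem.Set.empty] at h
    · rintro ⟨⟨_, huz⟩, _⟩
      exact absurd hu huz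
  · rw [if_neg hu, pvUnd2_getD_mem, pvUnd1_getD_mem]
    simp only [pvRelevantD_mem, pvParsD_mem, pvLookup_mem graph hPre]
    constructor
    · rintro ⟨hcc, himp⟩
      have key : pvInAnc graph x y z u ∧ pvInAnc graph x y z v ∧
          (pvEdge graph u v ∨ pvEdge graph v u ∨
            (u ≠ v ∧ ∃ c, pvInAnc graph x y z c ∧ pvEdge graph u c ∧ pvEdge graph v c)) := by
        rcases hcc with ⟨src, hsrc, dst, hedge, hdst, hm | hm⟩ |
          ⟨c, hc, ⟨heu, hua⟩, ⟨hev, hva⟩, hne⟩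
        · obtain ⟨rfl, rfl⟩ := hm
          exact ⟨hsrc, hdst, Or.inl hedge⟩
        · obtain ⟨rfl, rfl⟩ := hm
          exact ⟨hdst, hsrc, Or.inr (Or.inl hedge)⟩
        · exact ⟨hua, hva, Or.inr (Or.inr ⟨hne, c, hc, heu, hev⟩)⟩
      exact ⟨⟨key.1, hu⟩, ⟨key.2.1, himp ⟨key.1, hu⟩⟩, key.2.2⟩
    · rintro ⟨⟨hua, huz⟩, ⟨hva, hvz⟩, hadj⟩
      refine ⟨?_, fun _ => hvz⟩
      rcases hadj with he | he | ⟨hne, c, hc, he1, he2⟩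
      · exact Or.inl ⟨u, hua, v, he, hva, Or.inl ⟨rfl, rfl⟩⟩
      · exact Or.inl ⟨v, hva, u, he, hua, Or.inr ⟨rfl, rfl⟩⟩
      · exact Or.inr ⟨c, hc, ⟨he1, hua⟩, ⟨he2, hva⟩, hne⟩

-- B-side characterizations ---------------------------------------------------

def pvAncB (graph : List (String × List String)) (x y : String) (z : List String) :
    PySem.Set String :=
  pvReach (fun n => (graph.filter (fun p => p.2.contains n)).map (fun p => p.1))
    ((x :: y :: z).length + (PySem.Set.ofList (graph.map (fun p => p.1))).length)
    (x :: y :: z).reverse (PySem.Set.ofList (x :: y :: z))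

def pvLiveB (graph : List (String × List String)) (x y : String) (z : List String)
    (n : String) : Bool :=
  PySem.Set.contains (pvAncB graph x y z) n && !(z.contains n)

def pvMoralNbrsB (graph : List (String × List String)) (x y : String) (z : List String)
    (n : String) : List String :=
  graph.foldl (fun out p =>
    let out := if p.1 == n then out ++ p.2.filter (fun d => pvLiveB graph x y z d) else out
    if pvLiveB graph x y z p.1 then
      if p.2.contains n then out ++ [p.1]
      else if p.1 != n && ((List.lookup n graph).getD []).any
          (fun c => PySem.Set.contains (pvAncB graph x y z) c && p.2.contains c) then
        out ++ [p.1]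
      else out
    else out) []

def pvCnd (graph : List (String × List String)) (x y : String) (z : List String)
    (n m : String) (p : String × List String) : Prop :=
  (p.1 = n ∧ m ∈ p.2 ∧ pvLiveB graph x y z m = true) ∨
  (pvLiveB graph x y z p.1 = true ∧ p.1 = m ∧
    (n ∈ p.2 ∨ (p.1 ≠ n ∧ (((List.lookup n graph).getD []).any
      (fun c => PySem.Set.contains (pvAncB graph x y z) c && p.2.contains c)) = true)))

lemma pvAncB_mem (graph : List (String × List String)) (x y : String) (z : List String)
    (t : String) :
    t ∈ (pvAncB graph x y z : List String) ↔ pvInAnc graph x y z t := by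
  unfold pvAncB
  have hU : ∀ s m : String, m ∈ (graph.filter (fun p => p.2.contains s)).map (fun p => p.1) →
      m ∈ PySem.Set.ofList (graph.map (fun p => p.1)) := by
    intro s m hm
    rw [PySem.Set.mem_ofList]
    rcases List.mem_map.mp hm with ⟨p, hp, rfl⟩
    exact List.mem_map_of_mem (List.mem_of_mem_filter hp)
  have hfuel : pvMeas (PySem.Set.ofList (graph.map (fun p => p.1)))
      (PySem.Set.ofList (x :: y :: z)) (x :: y :: z).reverse ≤
      (x :: y :: z).length + (PySem.Set.ofList (graph.map (fun p => p.1))).length := by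
    unfold pvMeas
    rw [List.length_reverse]
    have := List.length_filter_le (fun u => decide (u ∉ PySem.Set.ofList (x :: y :: z)))
      (PySem.Set.ofList (graph.map (fun p => p.1)))
    omega
  rw [pvReach_mem_iff _ (PySem.Set.ofList (graph.map (fun p => p.1))) hU
      (PySem.Set.nodup_ofList _) _ _ _ (PySem.Set.nodup_ofList _)
      (fun s hs => (PySem.Set.mem_ofList _ _).mpr (List.mem_reverse.mp hs))
      (fun s hs hns => absurd (List.mem_reverse.mpr ((PySem.Set.mem_ofList _ _).mp hs)) hns)
      hfuel t]
  have hcong : ∀ a b : String,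
      (b ∈ (graph.filter (fun p => p.2.contains a)).map (fun p => p.1)) ↔ pvEdge graph b a := by
    intro a b
    unfold pvEdge
    constructor
    · intro hm
      rcases List.mem_map.mp hm with ⟨p, hp, rfl⟩
      have h1 := List.mem_of_mem_filter hp
      have h2 := List.of_mem_filter hp
      simp only [List.contains_iff_mem] at h2
      exact ⟨p, h1, rfl, h2⟩
    · rintro ⟨p, hp, rfl, h2⟩
      refine List.mem_map_of_mem (List.mem_filter.mpr ⟨hp, ?_⟩)
      simpa using h2
  unfold pvInAnc pvNbrClosure
  constructor
  · rintro (h | ⟨s, hs, hcl⟩)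
    · rw [PySem.Set.mem_ofList] at h
      exact ⟨t, by simpa using h, Relation.ReflTransGen.refl⟩
    · rw [List.mem_reverse] at hs
      exact ⟨s, by simpa using hs, (pvClosure_congr hcong s t).mp hcl⟩
  · rintro ⟨s, hs, hcl⟩
    right
    refine ⟨s, ?_, (pvClosure_congr hcong s t).mpr hcl⟩
    rw [List.mem_reverse]
    simpa using hs

lemma pvLiveB_iff (graph : List (String × List String)) (x y : String) (z : List String)
    (n : String) :
    pvLiveB graph x y z n = true ↔ pvLive graph x y z n := by
  unfold pvLiveB pvLive
  rw [Bool.and_eq_true]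
  constructor
  · rintro ⟨h1, h2⟩
    refine ⟨(pvAncB_mem graph x y z n).mp ?_, ?_⟩
    · rwa [PySem.Set.contains_iff] at h1
    · simpa using h2
  · rintro ⟨h1, h2⟩
    refine ⟨?_, by simpa using h2⟩
    rw [PySem.Set.contains_iff]
    exact (pvAncB_mem graph x y z n).mpr h1

lemma pvMoralNbrsB_mem_raw (graph : List (String × List String)) (x y : String)
    (z : List String) (n m : String) :
    m ∈ pvMoralNbrsB graph x y z n ↔ ∃ p ∈ graph, pvCnd graph x y z n m p := by
  unfold pvMoralNbrsB
  have hstep : ∀ (out : List String) (p : String × List String),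
      (m ∈ (let out2 := if p.1 == n then out ++ p.2.filter (fun d => pvLiveB graph x y z d)
          else out
        if pvLiveB graph x y z p.1 then
          if p.2.contains n then out2 ++ [p.1]
          else if p.1 != n && ((List.lookup n graph).getD []).any
              (fun c => PySem.Set.contains (pvAncB graph x y z) c && p.2.contains c) then
            out2 ++ [p.1]
          else out2
        else out2) ↔ m ∈ out ∨ pvCnd graph x y z n m p) := by
    intro out p
    unfold pvCnd
    by_cases hpn : p.1 = n
    · subst hpn
      by_cases hlive : pvLiveB graph x y z p.1 = true <;>
        by_cases hcont : p.1 ∈ p.2 <;>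
        by_cases hkid : ∃ c ∈ (List.lookup p.1 graph).getD [],
          c ∈ pvAncB graph x y z ∧ c ∈ p.2 <;>
        simp [hlive, hcont, hkid, List.mem_filter, bne] <;>
        tauto
    · by_cases hlive : pvLiveB graph x y z p.1 = true <;>
        by_cases hcont : n ∈ p.2 <;>
        by_cases hkid : ∃ c ∈ (List.lookup n graph).getD [],
          c ∈ pvAncB graph x y z ∧ c ∈ p.2 <;>
        simp [hpn, hlive, hcont, hkid, bne] <;>
        tauto
  have hfold : ∀ (l : List (String × List String)) (out : List String),
      (m ∈ l.foldl (fun out p =>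
        let out := if p.1 == n then out ++ p.2.filter (fun d => pvLiveB graph x y z d) else out
        if pvLiveB graph x y z p.1 then
          if p.2.contains n then out ++ [p.1]
          else if p.1 != n && ((List.lookup n graph).getD []).any
              (fun c => PySem.Set.contains (pvAncB graph x y z) c && p.2.contains c) then
            out ++ [p.1]
          else out
        else out) out ↔ m ∈ out ∨ ∃ p ∈ l, pvCnd graph x y z n m p) := by
    intro l
    induction l with
    | nil => simp
    | cons p l ih =>
      intro out
      rw [List.foldl_cons, ih, hstep]
      simp only [List.mem_cons]
      constructor
      · rintro ((h | h) | ⟨q, hq, hc⟩)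
        · exact Or.inl h
        · exact Or.inr ⟨p, Or.inl rfl, h⟩
        · exact Or.inr ⟨q, Or.inr hq, hc⟩
      · rintro (h | ⟨q, rfl | hq, hc⟩)
        · exact Or.inl (Or.inl h)
        · exact Or.inl (Or.inr hc)
        · exact Or.inr ⟨q, hq, hc⟩
  rw [hfold]
  simp

lemma pvMoralNbrsB_sub (graph : List (String × List String)) (x y : String) (z : List String)
    (n m : String) (h : m ∈ pvMoralNbrsB graph x y z n) :
    m ∈ graph.map (fun p => p.1) ++ (graph.map (fun p => p.2)).flatten := by
  rcases (pvMoralNbrsB_mem_raw graph x y z n m).mp h with ⟨p, hp, hc⟩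
  rw [List.mem_append]
  rcases hc with ⟨_, hm, _⟩ | ⟨_, rfl, _⟩
  · right
    exact List.mem_flatten.mpr ⟨p.2, List.mem_map_of_mem hp, hm⟩
  · left
    exact List.mem_map_of_mem hp

lemma pvMoralNbrsB_mem (graph : List (String × List String)) (x y : String) (z : List String)
    (hPre : (graph.map Prod.fst).Nodup) (n m : String) :
    m ∈ pvMoralNbrsB graph x y z n ↔ pvStepB graph x y z n m := by
  rw [pvMoralNbrsB_mem_raw]
  unfold pvStepB pvAdj
  constructor
  · rintro ⟨p, hp, hc⟩
    rcases hc with ⟨hpn, hm, hlm⟩ | ⟨hlp, rfl, hrest⟩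
    · exact ⟨(pvLiveB_iff graph x y z m).mp hlm, Or.inl ⟨p, hp, hpn, hm⟩⟩
    · refine ⟨(pvLiveB_iff graph x y z p.1).mp hlp, ?_⟩
      rcases hrest with hn | ⟨hne, hany⟩
      · exact Or.inr (Or.inl ⟨p, hp, rfl, hn⟩)
      · rcases List.any_eq_true.mp hany with ⟨c, hck, hcb⟩
        rw [Bool.and_eq_true] at hcb
        refine Or.inr (Or.inr ⟨fun hc => hne hc.symm, c, ?_, ?_, ?_⟩)
        · rw [← pvAncB_mem graph x y z c, ← PySem.Set.contains_iff]
          exact hcb.1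
        · exact (pvLookup_mem graph hPre n c).mp hck
        · refine ⟨p, hp, rfl, ?_⟩
          simpa using hcb.2
  · rintro ⟨hlm, hadj⟩
    have hlmb := (pvLiveB_iff graph x y z m).mpr hlm
    rcases hadj with ⟨p, hp, hpn, hm⟩ | ⟨p, hp, hpm, hn⟩ | ⟨hne, c, hcanc, hnc, q, hq, hqm, hcq⟩
    · exact ⟨p, hp, Or.inl ⟨hpn, hm, hlmb⟩⟩
    · refine ⟨p, hp, Or.inr ⟨?_, hpm, Or.inl hn⟩⟩
      rw [hpm]; exact hlmb
    · refine ⟨q, hq, Or.inr ⟨?_, hqm, ?_⟩⟩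
      · rw [hqm]; exact hlmb
      · by_cases hnq : n ∈ q.2
        · exact Or.inl hnq
        · refine Or.inr ⟨?_, ?_⟩
          · rw [hqm]; exact fun hc => hne hc.symm
          · rw [List.any_eq_true]
            refine ⟨c, (pvLookup_mem graph hPre n c).mpr hnc, ?_⟩
            rw [Bool.and_eq_true]
            constructor
            · rw [PySem.Set.contains_iff]
              exact (pvAncB_mem graph x y z c).mpr hcanc
            · simpa using hcq
  
-- assembly -------------------------------------------------------------------

lemma pvA_eq (graph : List (String × List String)) (x y : String) (z : List String)
    (hPre : (graph.map Prod.fst).Nodup) (hx : x ∉ z) (hy : y ∉ z) :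
    (is_d_separated graph x y z = true ↔
      ¬ Relation.ReflTransGen (pvStepA graph x y z) x y) := by
  have hcx : z.contains x = false := by simpa using hx
  have hcy : z.contains y = false := by simpa using hy
  have hxanc : pvInAnc graph x y z x := ⟨x, Or.inl rfl, Relation.ReflTransGen.refl⟩
  have hyanc : pvInAnc graph x y z y := ⟨y, Or.inr (Or.inl rfl), Relation.ReflTransGen.refl⟩
  have hcmx : (pvMoralized graph x y z).contains x = true :=
    (pvMoral_contains graph x y z x).mpr ⟨hxanc, hx⟩
  have hcmy : (pvMoralized graph x y z).contains y = true :=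
    (pvMoral_contains graph x y z y).mpr ⟨hyanc, hy⟩
  have hA : is_d_separated graph x y z = pvFindLoop (pvMoralized graph x y z) y
      (1 + (PySem.Set.ofList ((PySem.Dict.values (pvMoralized graph x y z)).flatten)).length)
      [x] (PySem.Set.ofList [x]) := by
    unfold is_d_separated
    rw [hcx, hcy]
    show (if !(pvMoralized graph x y z).contains x || !(pvMoralized graph x y z).contains y
        then true
        else pvFindLoop (pvMoralized graph x y z) y
          (1 + (PySem.Set.ofList ((PySem.Dict.values (pvMoralized graph x y z)).flatten)).length)
          [x] (PySem.Set.ofList [x])) = _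
    rw [hcmx, hcmy]
    rfl
  rw [hA]
  have hU : ∀ s m : String,
      m ∈ (PySem.Dict.getD (pvMoralized graph x y z) s PySem.Set.empty : List String) →
        m ∈ PySem.Set.ofList ((PySem.Dict.values (pvMoralized graph x y z)).flatten) :=
    fun s m hm => (PySem.Set.mem_ofList _ _).mpr (pvGetD_mem_values_flatten _ _ _ hm)
  have hseen : ∀ s : String, s ∈ (PySem.Set.ofList [x] : List String) ↔ s = x := by
    intro s
    rw [PySem.Set.mem_ofList]
    simp
  have hnd : (PySem.Set.ofList [x] : List String).Nodup := PySem.Set.nodup_ofList _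
  have hss : ∀ s ∈ [x], s ∈ (PySem.Set.ofList [x] : List String) := by
    intro s hs
    rw [hseen]
    simpa using hs
  have hproc : ∀ s ∈ (PySem.Set.ofList [x] : List String), s ∉ [x] →
      ∀ m ∈ (PySem.Dict.getD (pvMoralized graph x y z) s PySem.Set.empty : List String),
        m ∈ (PySem.Set.ofList [x] : List String) := by
    intro s hs hns
    exact absurd (by simpa using (hseen s).mp hs) hns
  have hfuel : pvMeas (PySem.Set.ofList ((PySem.Dict.values (pvMoralized graph x y z)).flatten))
      (PySem.Set.ofList [x]) [x] ≤
      1 + (PySem.Set.ofList ((PySem.Dict.values (pvMoralized graph x y z)).flatten)).length := by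
    unfold pvMeas
    have := List.length_filter_le (fun u => decide (u ∉ PySem.Set.ofList [x]))
      (PySem.Set.ofList ((PySem.Dict.values (pvMoralized graph x y z)).flatten))
    simp only [List.length_cons, List.length_nil]
    omega
  have hYst : y ∈ (PySem.Set.ofList [x] : List String) → y ∈ [x] := by
    intro h
    simpa using (hseen y).mp h
  rw [pvFind_eq_pvReach (pvMoralized graph x y z) y
      (PySem.Set.ofList ((PySem.Dict.values (pvMoralized graph x y z)).flatten)) hU
      (PySem.Set.nodup_ofList _)
      (1 + (PySem.Set.ofList ((PySem.Dict.values (pvMoralized graph x y z)).flatten)).length)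
      [x] (PySem.Set.ofList [x]) hnd hss hproc hfuel hYst]
  have hmem := pvReach_mem_iff
      (fun n => (PySem.Dict.getD (pvMoralized graph x y z) n PySem.Set.empty : List String))
      (PySem.Set.ofList ((PySem.Dict.values (pvMoralized graph x y z)).flatten)) hU
      (PySem.Set.nodup_ofList _)
      (1 + (PySem.Set.ofList ((PySem.Dict.values (pvMoralized graph x y z)).flatten)).length)
      [x] (PySem.Set.ofList [x]) hnd hss hproc hfuel y
  have hstepc : ∀ a b : String,
      (b ∈ (PySem.Dict.getD (pvMoralized graph x y z) a PySem.Set.empty : List String)) ↔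
        pvStepA graph x y z a b := fun a b => pvMoral_getD_mem graph x y z hPre a b
  have hiff : y ∈ pvReach
      (fun n => (PySem.Dict.getD (pvMoralized graph x y z) n PySem.Set.empty : List String))
      (1 + (PySem.Set.ofList ((PySem.Dict.values (pvMoralized graph x y z)).flatten)).length)
      [x] (PySem.Set.ofList [x]) ↔
      Relation.ReflTransGen (pvStepA graph x y z) x y := by
    rw [hmem]
    constructor
    · rintro (h | ⟨s, hs, hcl⟩)
      · have hyx : y = x := (hseen y).mp h
        rw [hyx]
      · have hsx : s = x := by simpa using hs
        subst hsx
        exact (pvClosure_congr hstepc s y).mp hcl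
    · intro h
      exact Or.inr ⟨x, by simp, (pvClosure_congr hstepc x y).mpr h⟩
  simp only [Bool.not_eq_true', decide_eq_false_iff_not]
  exact not_congr hiff

lemma pvB_eq (graph : List (String × List String)) (x y : String) (z : List String)
    (hPre : (graph.map Prod.fst).Nodup) (hx : x ∉ z) (hy : y ∉ z) :
    (is_d_separated_alt graph x y z = true ↔
      ¬ Relation.ReflTransGen (pvStepB graph x y z) x y) := by
  have hcx : z.contains x = false := by simpa using hx
  have hcy : z.contains y = false := by simpa using hy
  have hB : is_d_separated_alt graph x y z =
      !(PySem.Set.contains (pvReach (pvMoralNbrsB graph x y z)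
        (1 + (PySem.Set.ofList (graph.map (fun p => p.1) ++
          (graph.map (fun p => p.2)).flatten)).length)
        [x] (PySem.Set.ofList [x])) y) := by
    unfold is_d_separated_alt
    rw [hcx, hcy]
    rfl
  rw [hB]
  have hU : ∀ s m : String, m ∈ pvMoralNbrsB graph x y z s →
      m ∈ PySem.Set.ofList (graph.map (fun p => p.1) ++ (graph.map (fun p => p.2)).flatten) :=
    fun s m hm => (PySem.Set.mem_ofList _ _).mpr (pvMoralNbrsB_sub graph x y z s m hm)
  have hseen : ∀ s : String, s ∈ (PySem.Set.ofList [x] : List String) ↔ s = x := by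
    intro s
    rw [PySem.Set.mem_ofList]
    simp
  have hnd : (PySem.Set.ofList [x] : List String).Nodup := PySem.Set.nodup_ofList _
  have hss : ∀ s ∈ [x], s ∈ (PySem.Set.ofList [x] : List String) := by
    intro s hs
    rw [hseen]
    simpa using hs
  have hproc : ∀ s ∈ (PySem.Set.ofList [x] : List String), s ∉ [x] →
      ∀ m ∈ pvMoralNbrsB graph x y z s, m ∈ (PySem.Set.ofList [x] : List String) := by
    intro s hs hns
    exact absurd (by simpa using (hseen s).mp hs) hns
  have hfuel : pvMeas (PySem.Set.ofList (graph.map (fun p => p.1) ++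
      (graph.map (fun p => p.2)).flatten)) (PySem.Set.ofList [x]) [x] ≤
      1 + (PySem.Set.ofList (graph.map (fun p => p.1) ++
        (graph.map (fun p => p.2)).flatten)).length := by
    unfold pvMeas
    have := List.length_filter_le (fun u => decide (u ∉ PySem.Set.ofList [x]))
      (PySem.Set.ofList (graph.map (fun p => p.1) ++ (graph.map (fun p => p.2)).flatten))
    simp only [List.length_cons, List.length_nil]
    omega
  have hmem := pvReach_mem_iff (pvMoralNbrsB graph x y z)
      (PySem.Set.ofList (graph.map (fun p => p.1) ++ (graph.map (fun p => p.2)).flatten)) hU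
      (PySem.Set.nodup_ofList _)
      (1 + (PySem.Set.ofList (graph.map (fun p => p.1) ++
        (graph.map (fun p => p.2)).flatten)).length)
      [x] (PySem.Set.ofList [x]) hnd hss hproc hfuel y
  have hstepc : ∀ a b : String, (b ∈ pvMoralNbrsB graph x y z a) ↔ pvStepB graph x y z a b :=
    fun a b => pvMoralNbrsB_mem graph x y z hPre a b
  have hiff : y ∈ pvReach (pvMoralNbrsB graph x y z)
      (1 + (PySem.Set.ofList (graph.map (fun p => p.1) ++
        (graph.map (fun p => p.2)).flatten)).length)
      [x] (PySem.Set.ofList [x]) ↔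
      Relation.ReflTransGen (pvStepB graph x y z) x y := by
    rw [hmem]
    constructor
    · rintro (h | ⟨s, hs, hcl⟩)
      · have hyx : y = x := (hseen y).mp h
        rw [hyx]
      · have hsx : s = x := by simpa using hs
        subst hsx
        exact (pvClosure_congr hstepc s y).mp hcl
    · intro h
      exact Or.inr ⟨x, by simp, (pvClosure_congr hstepc x y).mpr h⟩
  have hc : PySem.Set.contains (pvReach (pvMoralNbrsB graph x y z)
      (1 + (PySem.Set.ofList (graph.map (fun p => p.1) ++
        (graph.map (fun p => p.2)).flatten)).length)
      [x] (PySem.Set.ofList [x])) y = true ↔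
      Relation.ReflTransGen (pvStepB graph x y z) x y :=
    Iff.trans (PySem.Set.contains_iff _ _) hiff
  rw [Bool.not_eq_true', Bool.eq_false_iff]
  exact not_congr hc

lemma pvClosure_iff (graph : List (String × List String)) (x y : String) (z : List String)
    (hx : x ∉ z) :
    Relation.ReflTransGen (pvStepA graph x y z) x y ↔
      Relation.ReflTransGen (pvStepB graph x y z) x y := by
  constructor
  · exact Relation.ReflTransGen.mono (fun {u v} h => ⟨h.2.1, h.2.2⟩)
  · intro h
    have main : ∀ u, Relation.ReflTransGen (pvStepB graph x y z) u y →
        pvLive graph x y z u → Relation.ReflTransGen (pvStepA graph x y z) u y := by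
      intro u hchain
      induction hchain using Relation.ReflTransGen.head_induction_on with
      | refl => exact fun _ => Relation.ReflTransGen.refl
      | head hstep _ ih =>
        exact fun hliveu =>
          Relation.ReflTransGen.head ⟨hliveu, hstep.1, hstep.2⟩ (ih hstep.1)
    exact main x h ⟨⟨x, Or.inl rfl, Relation.ReflTransGen.refl⟩, hx⟩

-- ===== VERDICT (by name: the statement is the Claim_ definition above) =====
theorem is_d_separated_spec : Claim_equal_is_d_separated := by
  intro graph x y z _hDom hPre
  unfold Spec_is_d_separated
  by_cases hx : x ∈ z
  · simp [is_d_separated, is_d_separated_alt, hx]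
  · by_cases hy : y ∈ z
    · simp [is_d_separated, is_d_separated_alt, hy]
    · rw [Bool.eq_iff_iff, pvA_eq graph x y z hPre hx hy, pvB_eq graph x y z hPre hx hy,
        pvClosure_iff graph x y z hx]
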